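-- pv_equiv track=rewrite | github.com/JoseCoscu/Ejercicios-DAA | Tree Distance-Pblm_4/brute_force.py | count_vertices_by_level
-- ===== SOURCE A (Python) =====
-- from collections import defaultdict, deque
--
-- def count_vertices_by_level(tree):
--     """Cuenta la cantidad de vértices en niveles pares e impares."""
--     level_count = {0: 0, 1: 0}  # {nivel_par: count, nivel_impar: count}
--
--     def bfs_count_levels(start_node):
--         queue = deque([(start_node, 0)])  # (nodo actual, nivel)
--         visited = set()
--
--         while queue:
--             current_node, level = queue.popleft()
--
--             if current_node not in visited:
--                 visited.add(current_node)
--                 level_count[level % 2] += 1  # Incrementar según el nivel par/impar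
--
--                 for neighbor in tree[current_node]:
--                     if neighbor not in visited:
--                         queue.append((neighbor, level + 1))
--
--     bfs_count_levels(0)  # Comenzar desde el nodo raíz (0)
--
--     return level_count[0], level_count[1]  # (pares, impares)
-- ===== SOURCE B (Python) =====
-- def count_vertices_by_level(tree):
--     """Cuenta la cantidad de vértices en niveles pares e impares."""
--     # Bellman-Ford-style relaxation to a fixpoint: no queue, no frontier.
--     # dist maps each discovered vertex to its shortest distance from 0;
--     # each sweep relaxes every edge out of every discovered vertex, until
--     # nothing changes; dist then holds the exact BFS levels, counted by parity.
--     dist = {0: 0}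
--     while True:
--         nxt = dict(dist)
--         for u in dist:
--             du = nxt[u]
--             for v in tree[u]:
--                 if v not in nxt or nxt[v] > du + 1:
--                     nxt[v] = du + 1
--         if nxt == dist:
--             break
--         dist = nxt
--     even = 0
--     odd = 0
--     for d in dist.values():
--         if d % 2 == 0:
--             even += 1
--         else:
--             odd += 1
--     return even, odd
-- ===== Notes on version B (the rewrite author's own statement) =====
-- stated objective: alternative
-- what changed: Replaces A's BFS (a deque of (node, level) pairs filtered by a visited set) with Bellman-Ford-style relaxation: a distance dict is swept repeatedly over the whole adjacency map until it stops changing (each sweep relaxes every edge), and the final distances are counted by parity; there is no queue, frontier or visited set.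
import Mathlib
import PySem

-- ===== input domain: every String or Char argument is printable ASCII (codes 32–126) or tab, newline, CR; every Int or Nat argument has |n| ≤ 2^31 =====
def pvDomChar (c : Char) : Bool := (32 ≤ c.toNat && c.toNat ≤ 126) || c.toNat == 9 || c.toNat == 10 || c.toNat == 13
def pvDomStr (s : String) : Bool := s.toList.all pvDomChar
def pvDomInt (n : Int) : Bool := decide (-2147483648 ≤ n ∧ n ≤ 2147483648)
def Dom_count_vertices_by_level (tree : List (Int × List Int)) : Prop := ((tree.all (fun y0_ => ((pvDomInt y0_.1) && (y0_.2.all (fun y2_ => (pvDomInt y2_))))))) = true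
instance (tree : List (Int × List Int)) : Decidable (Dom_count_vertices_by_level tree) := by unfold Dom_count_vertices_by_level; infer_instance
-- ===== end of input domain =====

-- B replaces A's BFS (deque of (node, level) pairs, visited filtered at pop) by a different
-- algorithm: Bellman-Ford-style relaxation — a distance map swept repeatedly over the whole
-- adjacency list until it stops changing, then counted by value parity (objective: alternative;
-- A is O(V+E), B is O(V·E) worst case — B is not claimed faster).

-- ===== PORT A =====
-- dict lookup tree[k] on the association list (first match)
def dget (tree : List (Int × List Int)) (k : Int) : Option (List Int) :=
  match tree with
  | [] => none
  | (k', a) :: t => if k' == k then some a else dget t k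

-- Set.contains / membership bridges
theorem pv_cmem {v : PySem.Set Int} {x : Int} (h : v.contains x = true) : x ∈ v :=
  (PySem.Set.contains_iff v x).1 h

theorem pv_cmem' {v : PySem.Set Int} {x : Int} (h : x ∈ v) : v.contains x = true :=
  (PySem.Set.contains_iff v x).2 h

theorem pv_contains_add_self (v : PySem.Set Int) (x : Int) : (v.add x).contains x = true :=
  pv_cmem' ((PySem.Set.mem_add v x x).2 (Or.inr rfl))

theorem pv_contains_add_of {v : PySem.Set Int} {k : Int} (x : Int) (h : v.contains k = true) :
    (v.add x).contains k = true :=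
  pv_cmem' ((PySem.Set.mem_add v x k).2 (Or.inl (pv_cmem h)))

-- termination helper for the loops of both ports: if the kept-elements predicate shrinks
-- at a member, the filtered list gets strictly shorter
theorem pv_filter_le {α : Type} (l : List α) (p q : α → Bool)
    (hmono : ∀ a ∈ l, q a = true → p a = true) :
    (l.filter q).length ≤ (l.filter p).length := by
  induction l with
  | nil => simp
  | cons a t ih =>
    have iht := ih (fun b hb => hmono b (List.mem_cons_of_mem _ hb))
    by_cases hq : q a = true
    · rw [List.filter_cons_of_pos hq, List.filter_cons_of_pos (hmono a List.mem_cons_self hq)]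
      simpa using iht
    · rw [List.filter_cons_of_neg (by simpa using hq)]
      by_cases hp : p a = true
      · rw [List.filter_cons_of_pos hp]
        simp only [List.length_cons]
        omega
      · rw [List.filter_cons_of_neg (by simpa using hp)]
        exact iht

theorem pv_filter_lt {α : Type} (l : List α) (p q : α → Bool)
    (hmono : ∀ a ∈ l, q a = true → p a = true)
    (y : α) (hy : y ∈ l) (hpy : p y = true) (hqy : q y = false) :
    (l.filter q).length < (l.filter p).length := by
  obtain ⟨l1, l2, rfl⟩ := List.append_of_mem hy
  have h1 := pv_filter_le l1 p q (fun b hb => hmono b (by simp [hb]))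
  have h2 := pv_filter_le l2 p q (fun b hb => hmono b (by simp [hb]))
  rw [List.filter_append, List.filter_append, List.length_append, List.length_append,
      List.filter_cons_of_pos hpy, List.filter_cons_of_neg (by simp [hqy])]
  simp only [List.length_cons]
  omega

theorem pv_filter_length_lt (l : List Int) (v w : PySem.Set Int) (y : Int)
    (hmono : ∀ k, v.contains k = true → w.contains k = true)
    (hy : y ∈ l) (hyv : v.contains y = false) (hyw : w.contains y = true) :
    (l.filter (fun k => !(w.contains k))).length < (l.filter (fun k => !(v.contains k))).length := by
  apply pv_filter_lt l (fun k => !(v.contains k)) (fun k => !(w.contains k)) _ y hy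
  · rw [hyv]; rfl
  · rw [hyw]; rfl
  · intro a _ hq
    simp only [Bool.not_eq_true'] at hq ⊢
    cases hva : v.contains a with
    | false => rfl
    | true => rw [hmono a hva] at hq; cases hq

-- BFS loop of A: queue of (node, level) pairs, visited filtered at pop time
def loopA (tree : List (Int × List Int)) :
    List (Int × Int) → PySem.Set Int → Int → Int → Int × Int
  | [], _, e, o => (e, o)
  | (x, l) :: q, v, e, o =>
    if hx : v.contains x then loopA tree q v e o
    else
      let v' := v.add x
      let e' := if PySem.Int.mod l 2 == 0 then e + 1 else e
      let o' := if PySem.Int.mod l 2 == 0 then o else o + 1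
      match h : dget tree x with
      | none => (e', o')  -- Python raises KeyError here (excluded by Pre_)
      | some adj =>
        loopA tree (q ++ (adj.filter (fun nb => !(v'.contains nb))).map (fun nb => (nb, l + 1))) v' e' o'
  termination_by q v _ _ => (((tree.map Prod.fst).filter (fun k => !(v.contains k))).length, q.length)
  decreasing_by
  · exact Prod.Lex.right _ (by simp)
  · apply Prod.Lex.left
    apply pv_filter_length_lt _ _ _ x
    · intro k hk
      exact pv_contains_add_of x hk
    · -- x is a key of tree
      clear hx
      induction tree with
      | nil => simp [dget] at h
      | cons p t ih =>
        obtain ⟨k', a⟩ := p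
        by_cases hk : k' == x
        · simp_all
        · simp only [dget, hk] at h
          simpa using Or.inr (ih h)
    · simpa using hx
    · exact pv_contains_add_self v x

def count_vertices_by_level (tree : List (Int × List Int)) : Int × Int :=
  loopA tree [((0 : Int), (0 : Int))] PySem.Set.empty 0 0

-- ===== PORT B =====
-- one relaxation of the edge (·, v) from a vertex whose current distance is du:
--   'if v not in nxt or nxt[v] > du + 1: nxt[v] = du + 1'
def relax1 (du : Int) (d : PySem.Dict Int Int) (v : Int) : PySem.Dict Int Int :=
  match d.get? v with
  | none => d.insert v (du + 1)
  | some dv => if du + 1 < dv then d.insert v (du + 1) else d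

-- one full sweep: 'for u in dist: du = nxt[u]; for v in tree[u]: relax'
def sweepB (tree : List (Int × List Int)) (d0 : PySem.Dict Int Int) : PySem.Dict Int Int :=
  d0.keys.foldl (fun d u =>
    match d.get? u with
    | none => d
    | some du =>
      match dget tree u with
      | none => d  -- Python raises KeyError here (excluded by Pre_)
      | some adj => adj.foldl (relax1 du) d) d0

-- equation lemmas for relax1
theorem relax1_none {d : PySem.Dict Int Int} {v : Int} (du : Int) (hv : d.get? v = none) :
    relax1 du d v = d.insert v (du + 1) := by
  unfold relax1; rw [hv]

theorem relax1_lt {d : PySem.Dict Int Int} {v dv : Int} {du : Int}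
    (hv : d.get? v = some dv) (hlt : du + 1 < dv) :
    relax1 du d v = d.insert v (du + 1) := by
  unfold relax1; rw [hv]; exact if_pos hlt

theorem relax1_ge {d : PySem.Dict Int Int} {v dv : Int} {du : Int}
    (hv : d.get? v = some dv) (hlt : ¬ du + 1 < dv) :
    relax1 du d v = d := by
  unfold relax1; rw [hv]; exact if_neg hlt

-- ---- helpers the port's termination proof cites (values only decrease, keys only append) ----
def nbrsOf (tree : List (Int × List Int)) : List Int := tree.flatMap (fun p => p.2)

def gapB (tree : List (Int × List Int)) (d : PySem.Dict Int Int) : Nat :=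
  ((nbrsOf tree).filter (fun v => !(d.contains v))).length

def mvalB (d : PySem.Dict Int Int) : Int := d.values.foldl min 0

def valSumB (d : PySem.Dict Int Int) : Nat :=
  (d.values.map (fun v => (v - mvalB d).toNat)).sum

-- evolution order: every key survives and its value never increases
def DLe (d d' : PySem.Dict Int Int) : Prop :=
  ∀ k v, d.get? k = some v → ∃ v', d'.get? k = some v' ∧ v' ≤ v

theorem DLe_refl (d : PySem.Dict Int Int) : DLe d d :=
  fun _ v h => ⟨v, h, le_refl v⟩

theorem DLe_trans {a b c : PySem.Dict Int Int} (h1 : DLe a b) (h2 : DLe b c) : DLe a c := by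
  intro k v h
  obtain ⟨v', hv', hle'⟩ := h1 k v h
  obtain ⟨v'', hv'', hle''⟩ := h2 k v' hv'
  exact ⟨v'', hv'', le_trans hle'' hle'⟩

theorem relax1_DLe (du : Int) (d : PySem.Dict Int Int) (v : Int) : DLe d (relax1 du d v) := by
  intro k w h
  cases hv : d.get? v with
  | none =>
    have hkv : k ≠ v := by intro he; rw [he, hv] at h; cases h
    rw [relax1_none du hv]
    exact ⟨w, by rw [PySem.Dict.get?_insert_of_ne d (du + 1) hkv, h], le_refl w⟩
  | some dv =>
    by_cases hlt : du + 1 < dv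
    · rw [relax1_lt hv hlt]
      by_cases hkv : k = v
      · subst hkv
        rw [hv] at h
        injection h with h
        subst h
        exact ⟨du + 1, PySem.Dict.get?_insert_self d _ (du + 1), le_of_lt hlt⟩
      · exact ⟨w, by rw [PySem.Dict.get?_insert_of_ne d (du + 1) hkv, h], le_refl w⟩
    · rw [relax1_ge hv hlt]
      exact ⟨w, h, le_refl w⟩

theorem foldl_relax1_DLe (l : List Int) : ∀ (du : Int) (d : PySem.Dict Int Int),
    DLe d (l.foldl (relax1 du) d) := by
  induction l with
  | nil => intro du d; exact DLe_refl d
  | cons x t ih =>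
    intro du d
    exact DLe_trans (relax1_DLe du d x) (ih du (relax1 du d x))

theorem sweepB_DLe (tree : List (Int × List Int)) : ∀ (l : List Int)
    (d : PySem.Dict Int Int),
    DLe d (l.foldl (fun d u =>
      match d.get? u with
      | none => d
      | some du =>
        match dget tree u with
        | none => d
        | some adj => adj.foldl (relax1 du) d) d) := by
  intro l
  induction l with
  | nil => intro d; exact DLe_refl d
  | cons u t ih =>
    intro d
    refine DLe_trans ?_ (ih _)
    cases hg : d.get? u with
    | none => simp only [hg]; exact DLe_refl d
    | some du =>
      simp only [hg]
      cases hadj : dget tree u with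
      | none => exact DLe_refl d
      | some adj => exact foldl_relax1_DLe _ du d

theorem sweepB_DLe' (tree : List (Int × List Int)) (d : PySem.Dict Int Int) :
    DLe d (sweepB tree d) := sweepB_DLe tree d.keys d

-- keys of the sweep: the old key list plus freshly discovered neighbours appended
theorem relax1_keys (du : Int) (d : PySem.Dict Int Int) (v : Int) :
    (relax1 du d v).keys = d.keys ∨ (relax1 du d v).keys = d.keys ++ [v] := by
  cases hv : d.get? v with
  | none =>
    right
    rw [relax1_none du hv]
    apply PySem.Dict.keys_insert_of_not_contains
    rw [PySem.Dict.contains_eq_isSome_get?, hv]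
    rfl
  | some dv =>
    left
    by_cases hlt : du + 1 < dv
    · rw [relax1_lt hv hlt]
      apply PySem.Dict.keys_insert_of_contains
      rw [PySem.Dict.contains_eq_isSome_get?, hv]
      rfl
    · rw [relax1_ge hv hlt]

theorem foldl_relax1_keys (l : List Int) : ∀ (du : Int) (d : PySem.Dict Int Int),
    ∃ ex, (l.foldl (relax1 du) d).keys = d.keys ++ ex ∧ ∀ k ∈ ex, k ∈ l := by
  induction l with
  | nil => intro du d; exact ⟨[], by simp, by simp⟩
  | cons x t ih =>
    intro du d
    obtain ⟨ex, hex, hsub⟩ := ih du (relax1 du d x)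
    rcases relax1_keys du d x with h | h
    · exact ⟨ex, by rw [List.foldl_cons, hex, h], fun k hk => List.mem_cons_of_mem _ (hsub k hk)⟩
    · refine ⟨x :: ex, ?_, ?_⟩
      · rw [List.foldl_cons, hex, h, List.append_assoc]; rfl
      · intro k hk
        rcases List.mem_cons.1 hk with h0 | h1
        · exact h0 ▸ List.mem_cons_self
        · exact List.mem_cons_of_mem _ (hsub k h1)

theorem dget_mem {tree : List (Int × List Int)} {x : Int} {a : List Int}
    (h : dget tree x = some a) : (x, a) ∈ tree := by
  induction tree with
  | nil => simp [dget] at h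
  | cons p t ih =>
    obtain ⟨k', b⟩ := p
    by_cases hk : k' == x
    · simp only [dget, hk, if_true, Option.some.injEq] at h
      simp only [beq_iff_eq] at hk
      simp [hk, h]
    · simp only [dget, hk] at h
      exact List.mem_cons_of_mem _ (ih h)

theorem dget_sub_nbrs (tree : List (Int × List Int)) (u : Int) :
    ∀ k ∈ (dget tree u).getD [], k ∈ nbrsOf tree := by
  intro k hk
  cases h : dget tree u with
  | none => rw [h] at hk; cases hk
  | some adj =>
    rw [h] at hk
    exact List.mem_flatMap.2 ⟨(u, adj), dget_mem h, hk⟩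

theorem sweepB_keys (tree : List (Int × List Int)) : ∀ (l : List Int)
    (d : PySem.Dict Int Int),
    ∃ ex, (l.foldl (fun d u =>
      match d.get? u with
      | none => d
      | some du =>
        match dget tree u with
        | none => d
        | some adj => adj.foldl (relax1 du) d) d).keys = d.keys ++ ex ∧
      ∀ k ∈ ex, k ∈ nbrsOf tree := by
  intro l
  induction l with
  | nil => intro d; exact ⟨[], by simp, by simp⟩
  | cons u t ih =>
    intro d
    cases hg : d.get? u with
    | none =>
      obtain ⟨ex, hex, hsub⟩ := ih d
      exact ⟨ex, by simp only [List.foldl_cons, hg]; exact hex, hsub⟩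
    | some du =>
      cases hadj : dget tree u with
      | none =>
        obtain ⟨ex, hex, hsub⟩ := ih d
        exact ⟨ex, by simp only [List.foldl_cons, hg, hadj]; exact hex, hsub⟩
      | some adj =>
        obtain ⟨ex1, hex1, hsub1⟩ := foldl_relax1_keys adj du d
        obtain ⟨ex2, hex2, hsub2⟩ := ih (adj.foldl (relax1 du) d)
        refine ⟨ex1 ++ ex2, ?_, ?_⟩
        · simp only [List.foldl_cons, hg, hadj]
          rw [hex2, hex1, List.append_assoc]
        · intro k hk
          rcases List.mem_append.1 hk with h1 | h2
          · apply dget_sub_nbrs tree u k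
            rw [hadj]
            exact hsub1 k h1
          · exact hsub2 k h2

theorem sweepB_keys' (tree : List (Int × List Int)) (d : PySem.Dict Int Int) :
    ∃ ex, (sweepB tree d).keys = d.keys ++ ex ∧ ∀ k ∈ ex, k ∈ nbrsOf tree :=
  sweepB_keys tree d.keys d

theorem relax1_nodup (du : Int) (d : PySem.Dict Int Int) (v : Int)
    (h : d.keys.Nodup) : (relax1 du d v).keys.Nodup := by
  cases hv : d.get? v with
  | none => rw [relax1_none du hv]; exact PySem.Dict.nodup_keys_insert _ _ _ h
  | some dv =>
    by_cases hlt : du + 1 < dv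
    · rw [relax1_lt hv hlt]; exact PySem.Dict.nodup_keys_insert _ _ _ h
    · rw [relax1_ge hv hlt]; exact h

theorem foldl_relax1_nodup (l : List Int) : ∀ (du : Int) (d : PySem.Dict Int Int),
    d.keys.Nodup → (l.foldl (relax1 du) d).keys.Nodup := by
  induction l with
  | nil => intro du d h; exact h
  | cons x t ih => intro du d h; exact ih du _ (relax1_nodup du d x h)

theorem sweepB_nodup_aux (tree : List (Int × List Int)) : ∀ (l : List Int)
    (d : PySem.Dict Int Int), d.keys.Nodup →
    (l.foldl (fun d u =>
      match d.get? u with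
      | none => d
      | some du =>
        match dget tree u with
        | none => d
        | some adj => adj.foldl (relax1 du) d) d).keys.Nodup := by
  intro l
  induction l with
  | nil => intro d h; exact h
  | cons u t ih =>
    intro d h
    rw [List.foldl_cons]
    cases hg : d.get? u with
    | none => exact ih d h
    | some du =>
      cases hadj : dget tree u with
      | none => exact ih d h
      | some adj => exact ih _ (foldl_relax1_nodup _ du d h)

theorem sweepB_nodup (tree : List (Int × List Int)) (d : PySem.Dict Int Int)
    (h : d.keys.Nodup) : (sweepB tree d).keys.Nodup := sweepB_nodup_aux tree d.keys d h

-- every value of the dict is bounded below by mvalB, and sweeps never lower the bound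
theorem pv_mval_le (d : PySem.Dict Int Int) : mvalB d ≤ 0 ∧ ∀ v ∈ d.values, mvalB d ≤ v :=
  PySem.List.foldl_min_le d.values 0

theorem pv_le_foldl_min_aux (l : List Int) : ∀ (m a : Int), m ≤ a → (∀ v ∈ l, m ≤ v) →
    m ≤ l.foldl min a := by
  induction l with
  | nil => intro m a hm _; simpa using hm
  | cons x t ih =>
    intro m a hm h
    rw [List.foldl_cons]
    exact ih m (min a x) (le_min hm (h x List.mem_cons_self))
      (fun v hv => h v (List.mem_cons_of_mem _ hv))

theorem pv_le_foldl_min (l : List Int) (m : Int) (hm : m ≤ 0) (h : ∀ v ∈ l, m ≤ v) :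
    m ≤ l.foldl min 0 := pv_le_foldl_min_aux l m 0 hm h

def MinB (m : Int) (d : PySem.Dict Int Int) : Prop := ∀ v ∈ d.values, m ≤ v

theorem relax1_MinB {m du : Int} {d : PySem.Dict Int Int} (v : Int)
    (hd : MinB m d) (hdu : m ≤ du + 1) : MinB m (relax1 du d v) := by
  intro w hw
  cases hv : d.get? v with
  | none =>
    rw [relax1_none du hv] at hw
    rcases PySem.Dict.mem_values_insert d _ _ _ hw with h | h
    · omega
    · exact hd w h
  | some dv =>
    by_cases hlt : du + 1 < dv
    · rw [relax1_lt hv hlt] at hw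
      rcases PySem.Dict.mem_values_insert d _ _ _ hw with h | h
      · omega
      · exact hd w h
    · rw [relax1_ge hv hlt] at hw
      exact hd w hw

theorem foldl_relax1_MinB {m du : Int} (l : List Int) : ∀ (d : PySem.Dict Int Int),
    MinB m d → m ≤ du + 1 → MinB m (l.foldl (relax1 du) d) := by
  induction l with
  | nil => intro d hd _; exact hd
  | cons x t ih => intro d hd hdu; exact ih _ (relax1_MinB x hd hdu) hdu

theorem pv_get?_mem_values {d : PySem.Dict Int Int} {k v : Int}
    (h : d.get? k = some v) : v ∈ d.values := by
  have := PySem.Dict.mem_items_of_get?_eq_some d h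
  exact List.mem_map.2 ⟨(k, v), this, rfl⟩

theorem sweepB_MinB_aux (tree : List (Int × List Int)) {m : Int} :
    ∀ (l : List Int) (d : PySem.Dict Int Int), MinB m d → m ≤ 0 →
    MinB m (l.foldl (fun d u =>
      match d.get? u with
      | none => d
      | some du =>
        match dget tree u with
        | none => d
        | some adj => adj.foldl (relax1 du) d) d) := by
  intro l
  induction l with
  | nil => intro d hd _; exact hd
  | cons u t ih =>
    intro d hd hm0
    rw [List.foldl_cons]
    cases hg : d.get? u with
    | none => exact ih d hd hm0
    | some du =>
      cases hadj : dget tree u with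
      | none => exact ih d hd hm0
      | some adj =>
        have hdu : m ≤ du := hd du (pv_get?_mem_values hg)
        exact ih _ (foldl_relax1_MinB _ d hd (by omega)) hm0

theorem sweepB_MinB (tree : List (Int × List Int)) (d : PySem.Dict Int Int) :
    MinB (mvalB d) (sweepB tree d) :=
  sweepB_MinB_aux tree d.keys d (pv_mval_le d).2 (pv_mval_le d).1

theorem sweepB_mval_le (tree : List (Int × List Int)) (d : PySem.Dict Int Int) :
    mvalB d ≤ mvalB (sweepB tree d) :=
  pv_le_foldl_min _ _ (pv_mval_le d).1 (sweepB_MinB tree d)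

-- get?-extensionality for nodup-keyed dicts with equal key lists
theorem pv_dict_ext {d d' : PySem.Dict Int Int} (hnd : d.keys.Nodup)
    (hk : d'.keys = d.keys) (hnd' : d'.keys.Nodup)
    (hget : ∀ k, d.get? k = d'.get? k) : d' = d := by
  apply PySem.Dict.ext
  rw [PySem.Dict.items_eq_map_keys d hnd 0, PySem.Dict.items_eq_map_keys d' hnd' 0, hk]
  apply List.map_congr_left
  intro k _
  rw [PySem.Dict.getD_eq_get?_getD, PySem.Dict.getD_eq_get?_getD, hget k]

-- a sweep that changes the dict strictly shrinks the measure (gapB, valSumB) lexicographically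
theorem sweep_dec (tree : List (Int × List Int)) (d : PySem.Dict Int Int)
    (hnd : d.keys.Nodup) (hne : ¬ sweepB tree d = d) :
    Prod.Lex (· < ·) (· < ·) (gapB tree (sweepB tree d), valSumB (sweepB tree d))
      (gapB tree d, valSumB d) := by
  obtain ⟨ex, hex, hsub⟩ := sweepB_keys' tree d
  have hnd' : (sweepB tree d).keys.Nodup := sweepB_nodup tree d hnd
  cases hcex : ex with
  | cons k0 ex' =>
    -- a brand-new key was discovered: the unvisited-neighbours gap shrinks
    apply Prod.Lex.left
    have hk0new : k0 ∉ d.keys := by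
      rw [hcex] at hex
      rw [hex] at hnd'
      have := List.disjoint_of_nodup_append hnd'
      exact fun hmem => this hmem List.mem_cons_self
    have hk0mem : k0 ∈ (sweepB tree d).keys := by
      rw [hex, hcex]; exact List.mem_append_right _ List.mem_cons_self
    apply pv_filter_lt (nbrsOf tree) (fun v => !(d.contains v)) (fun v => !((sweepB tree d).contains v)) _ k0
    · exact hsub k0 (hcex ▸ List.mem_cons_self)
    · rw [Bool.not_eq_true']
      rw [← Bool.not_eq_true, PySem.Dict.contains_iff_mem_keys]
      exact hk0new
    · have : (sweepB tree d).contains k0 = true :=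
        (PySem.Dict.contains_iff_mem_keys _ k0).2 hk0mem
      rw [this]
      rfl
    · intro a _ hq
      rw [Bool.not_eq_true'] at hq ⊢
      cases hc : d.contains a with
      | false => rfl
      | true =>
        exfalso
        have : a ∈ (sweepB tree d).keys := by
          rw [hex]
          exact List.mem_append_left _ ((PySem.Dict.contains_iff_mem_keys d a).1 hc)
        rw [← PySem.Dict.contains_iff_mem_keys] at this
        rw [this] at hq
        cases hq
  | nil =>
    -- same keys: some value strictly decreased, so the value potential shrinks
    rw [hcex, List.append_nil] at hex
    have hgap : gapB tree (sweepB tree d) = gapB tree d := by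
      unfold gapB
      congr 1
      apply List.filter_congr
      intro a _
      congr 1
      cases hc : d.contains a with
      | true =>
        rw [PySem.Dict.contains_iff_mem_keys] at hc ⊢
        rw [hex]; exact hc
      | false =>
        rw [← Bool.not_eq_true, PySem.Dict.contains_iff_mem_keys] at hc ⊢
        rw [hex]; exact hc
    rw [hgap]
    apply Prod.Lex.right
    -- find the key whose value strictly dropped
    have hDLe := sweepB_DLe' tree d
    have hdiff : ∃ k0 v0 v0', d.get? k0 = some v0 ∧ (sweepB tree d).get? k0 = some v0' ∧ v0' < v0 := by
      by_contra hall
      push_neg at hall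
      apply hne
      apply pv_dict_ext hnd hex hnd'
      intro k
      cases hg : d.get? k with
      | none =>
        rw [PySem.Dict.get?_eq_none_iff_not_mem_keys] at hg
        symm
        rw [PySem.Dict.get?_eq_none_iff_not_mem_keys, hex]
        exact hg
      | some v =>
        obtain ⟨v', hv', hle⟩ := hDLe k v hg
        have := hall k v v' hg hv'
        rw [hv']
        congr 1
        omega
    obtain ⟨k0, v0, v0', hg0, hg0', hlt0⟩ := hdiff
    have hm := sweepB_mval_le tree d
    have hmin := pv_mval_le d
    have hmin' := pv_mval_le (sweepB tree d)
    unfold valSumB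
    rw [PySem.Dict.values_eq_map_keys d hnd 0, PySem.Dict.values_eq_map_keys _ hnd' 0, hex,
        List.map_map, List.map_map]
    apply List.sum_lt_sum
    · intro k hk
      simp only [Function.comp_apply]
      rw [PySem.Dict.getD_eq_get?_getD, PySem.Dict.getD_eq_get?_getD]
      cases hg : d.get? k with
      | none =>
        exfalso
        rw [PySem.Dict.get?_eq_none_iff_not_mem_keys] at hg
        exact hg hk
      | some v =>
        obtain ⟨v', hv', hle⟩ := hDLe k v hg
        rw [hv']
        have h1 : mvalB d ≤ v := (pv_mval_le d).2 v (pv_get?_mem_values hg)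
        have h2 : mvalB (sweepB tree d) ≤ v' := (pv_mval_le _).2 v' (pv_get?_mem_values hv')
        simp only [Option.getD_some]
        omega
    · refine ⟨k0, ?_, ?_⟩
      · rw [← hex]
        rw [← PySem.Dict.contains_iff_mem_keys]
        rw [PySem.Dict.contains_eq_isSome_get?, hg0']
        rfl
      · simp only [Function.comp_apply]
        rw [PySem.Dict.getD_eq_get?_getD, PySem.Dict.getD_eq_get?_getD, hg0, hg0']
        have h1 : mvalB d ≤ v0 := (pv_mval_le d).2 v0 (pv_get?_mem_values hg0)
        have h2 : mvalB (sweepB tree d) ≤ v0' := (pv_mval_le _).2 v0' (pv_get?_mem_values hg0')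
        simp only [Option.getD_some]
        omega

-- the fixpoint loop: 'while True: nxt = sweep(dist); if nxt == dist: break; dist = nxt'
-- (the Nodup argument is proof-only: it makes the loop's termination measure provable)
def bfLoop (tree : List (Int × List Int)) (d : PySem.Dict Int Int)
    (hnd : d.keys.Nodup) : PySem.Dict Int Int :=
  if h : sweepB tree d = d then d
  else bfLoop tree (sweepB tree d) (sweepB_nodup tree d hnd)
  termination_by (gapB tree d, valSumB d)
  decreasing_by exact sweep_dec tree d hnd h

def count_vertices_by_level_alt (tree : List (Int × List Int)) : Int × Int :=
  let dist := bfLoop tree (PySem.Dict.empty.insert 0 0) (by decide)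
  dist.values.foldl
    (fun p dv => if PySem.Int.mod dv 2 == 0 then (p.1 + 1, p.2) else (p.1, p.2 + 1)) (0, 0)

-- ===== PRECONDITION & SPEC =====
-- helpers for Pre_: the set of vertices reachable from 0 (through vertices that are keys),
-- computed as an N-step closure, N = number of distinct vertex names occurring in the input
def rstep (acc : PySem.Set Int) (p : Int × List Int) : PySem.Set Int :=
  if acc.contains p.1 then PySem.Set.update acc p.2 else acc

def reachStep (tree : List (Int × List Int)) (S : PySem.Set Int) : PySem.Set Int :=
  tree.foldl rstep S

def reachIter (tree : List (Int × List Int)) : Nat → PySem.Set Int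
  | 0 => PySem.Set.add PySem.Set.empty 0
  | k + 1 => reachStep tree (reachIter tree k)

def pvU (tree : List (Int × List Int)) : List Int :=
  (0 : Int) :: tree.flatMap (fun p => p.2)

def reachSet (tree : List (Int × List Int)) : PySem.Set Int :=
  reachIter tree ((pvU tree).dedup.length)

-- Pre_ holds exactly when every vertex reachable from 0 is a key of the adjacency map:
-- on any other input A's BFS reaches the missing vertex and raises KeyError
def Pre_count_vertices_by_level (tree : List (Int × List Int)) : Prop :=
  ∀ n ∈ reachSet tree, n ∈ tree.map Prod.fst
instance (tree : List (Int × List Int)) : Decidable (Pre_count_vertices_by_level tree) := by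
  unfold Pre_count_vertices_by_level; infer_instance

def pvWitness_count_vertices_by_level : (List (Int × List Int)) := [(0, [1, 2]), (1, [0]), (2, [2])]

def Spec_count_vertices_by_level (tree : List (Int × List Int)) (out : Int × Int) : Prop := out = count_vertices_by_level_alt tree
instance (tree : List (Int × List Int)) (out : Int × Int) : Decidable (Spec_count_vertices_by_level tree out) := by unfold Spec_count_vertices_by_level; infer_instance

-- ===== CLAIM (what is proved, stated in full; the proofs are below) =====
def Claim_equal_count_vertices_by_level : Prop := ∀ (tree : List (Int × List Int)), Dom_count_vertices_by_level tree → Pre_count_vertices_by_level tree → Spec_count_vertices_by_level tree (count_vertices_by_level tree)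

-- ===== LEMMAS AND PROOFS =====

theorem pv_contains_add_false {v : PySem.Set Int} {x k : Int}
    (h : (v.add x).contains k = false) : v.contains k = false := by
  cases hc : v.contains k with
  | false => rfl
  | true => rw [pv_contains_add_of x hc] at h; cases h

-- ---------- proof-layer ghost: the level-synchronous BFS both programs are compared to ----------
-- body of the frontier-collecting loop (mark-at-discovery) and its characterisation
def stepC (p : PySem.Set Int × List Int) (nb : Int) : PySem.Set Int × List Int :=
  if p.1.contains nb then p else (p.1.add nb, p.2 ++ [nb])

def collect (v : PySem.Set Int) (l : List Int) : PySem.Set Int × List Int :=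
  l.foldl stepC (v, [])

theorem stepC_t {v : PySem.Set Int} {x : Int} (a : List Int) (hx : v.contains x = true) :
    stepC (v, a) x = (v, a) := by unfold stepC; rw [hx]; simp

theorem stepC_f {v : PySem.Set Int} {x : Int} (a : List Int) (hx : v.contains x = false) :
    stepC (v, a) x = (v.add x, a ++ [x]) := by unfold stepC; rw [hx]; simp

theorem collect_acc (l : List Int) : ∀ (v : PySem.Set Int) (a : List Int),
    l.foldl stepC (v, a) = ((collect v l).1, a ++ (collect v l).2) := by
  induction l with
  | nil => intro v a; simp [collect]
  | cons x t ih =>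
    intro v a
    cases hx : v.contains x with
    | true =>
      simp only [collect, List.foldl_cons, stepC_t a hx, stepC_t [] hx]
      rw [ih v a, ih v []]
      simp [collect]
    | false =>
      simp only [collect, List.foldl_cons, stepC_f a hx, stepC_f [] hx, List.nil_append]
      rw [ih (v.add x) (a ++ [x]), ih (v.add x) [x]]
      simp [collect]

theorem collect_cons_t {v : PySem.Set Int} {x : Int} (t : List Int) (hx : v.contains x = true) :
    collect v (x :: t) = collect v t := by
  simp only [collect, List.foldl_cons, stepC_t [] hx]

theorem collect_cons_f {v : PySem.Set Int} {x : Int} (t : List Int) (hx : v.contains x = false) :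
    collect v (x :: t) = ((collect (v.add x) t).1, x :: (collect (v.add x) t).2) := by
  simp only [collect, List.foldl_cons, stepC_f [] hx, List.nil_append]
  rw [collect_acc]
  simp [collect]

theorem collect_append (v : PySem.Set Int) (a b : List Int) :
    collect v (a ++ b) =
      ((collect (collect v a).1 b).1, (collect v a).2 ++ (collect (collect v a).1 b).2) := by
  simp only [collect, List.foldl_append]
  rw [show (a.foldl stepC (v, [])) = ((collect v a).1, [] ++ (collect v a).2) from collect_acc a v [],
      List.nil_append]
  rw [collect_acc]
  simp [collect]

theorem collect_mono (l : List Int) : ∀ (v : PySem.Set Int) (k : Int),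
    v.contains k = true → (collect v l).1.contains k = true := by
  induction l with
  | nil => intro v k h; simpa [collect] using h
  | cons x t ih =>
    intro v k h
    cases hx : v.contains x with
    | true => rw [collect_cons_t t hx]; exact ih v k h
    | false =>
      rw [collect_cons_f t hx]
      exact ih (v.add x) k (pv_contains_add_of x h)

theorem collect_out (l : List Int) : ∀ (v : PySem.Set Int) (y : Int),
    y ∈ (collect v l).2 →
    y ∈ l ∧ v.contains y = false ∧ (collect v l).1.contains y = true := by
  induction l with
  | nil => intro v y h; simp [collect] at h
  | cons x t ih =>
    intro v y h
    cases hx : v.contains x with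
    | true =>
      rw [collect_cons_t t hx] at h ⊢
      obtain ⟨h1, h2, h3⟩ := ih v y h
      exact ⟨List.mem_cons_of_mem _ h1, h2, h3⟩
    | false =>
      rw [collect_cons_f t hx] at h ⊢
      rcases List.mem_cons.1 h with h0 | h'
      · subst h0
        exact ⟨List.mem_cons_self, hx, collect_mono t (v.add y) y (pv_contains_add_self v y)⟩
      · obtain ⟨h1, h2, h3⟩ := ih (v.add x) y h'
        exact ⟨List.mem_cons_of_mem _ h1, pv_contains_add_false h2, h3⟩

theorem collect_nil_out (l : List Int) : ∀ (v : PySem.Set Int),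
    (collect v l).2 = [] → (collect v l).1 = v := by
  induction l with
  | nil => intro v _; simp [collect]
  | cons x t ih =>
    intro v h
    cases hx : v.contains x with
    | true => rw [collect_cons_t t hx] at h ⊢; exact ih v h
    | false => rw [collect_cons_f t hx] at h; cases h

-- inner loop of the ghost: one BFS level; discovers, marks and gathers fresh neighbours
def innerB (tree : List (Int × List Int)) :
    List Int → PySem.Set Int → List Int → PySem.Set Int × List Int
  | [], v, nxt => (v, nxt)
  | x :: rest, v, nxt =>
    match dget tree x with
    | none => innerB tree rest v nxt
    | some adj =>
      let p := adj.foldl stepC (v, nxt)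
      innerB tree rest p.1 p.2

def flatB (tree : List (Int × List Int)) (f : List Int) : List Int :=
  f.flatMap (fun x => (dget tree x).getD [])

theorem innerB_eq (tree : List (Int × List Int)) (f : List Int) :
    ∀ (v : PySem.Set Int) (nxt : List Int),
    innerB tree f v nxt =
      ((collect v (flatB tree f)).1, nxt ++ (collect v (flatB tree f)).2) := by
  induction f with
  | nil => intro v nxt; simp [innerB, flatB, collect]
  | cons x rest ih =>
    intro v nxt
    cases h : dget tree x with
    | none =>
      simp only [innerB, h]
      rw [ih]
      simp [flatB, h]
    | some adj =>
      simp only [innerB, h]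
      rw [collect_acc, ih]
      have hflat : flatB tree (x :: rest) = adj ++ flatB tree rest := by
        simp [flatB, h]
      rw [hflat, collect_append]
      simp

theorem flatB_sub (tree : List (Int × List Int)) (f : List Int) (y : Int)
    (hy : y ∈ flatB tree f) : y ∈ tree.flatMap (fun pr => pr.2) := by
  simp only [flatB, List.mem_flatMap] at hy
  obtain ⟨x, _, hyx⟩ := hy
  cases h : dget tree x with
  | none => simp [h] at hyx
  | some adj =>
    simp only [h, Option.getD_some] at hyx
    exact List.mem_flatMap.2 ⟨(x, adj), dget_mem h, hyx⟩

-- outer loop of the ghost: one iteration per BFS level, parity bit flipped each round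
def loopB (tree : List (Int × List Int)) :
    List Int → PySem.Set Int → Int → Int × Int → Int × Int
  | [], _, _, counts => counts
  | x :: rest, v, parity, (e, o) =>
    let e' := if parity == 0 then e + ((x :: rest).length : Int) else e
    let o' := if parity == 0 then o else o + ((x :: rest).length : Int)
    let p := innerB tree (x :: rest) v []
    loopB tree p.2 p.1 (1 - parity) (e', o')
  termination_by f v _ _ =>
    (((tree.flatMap (fun pr => pr.2)).filter (fun k => !(v.contains k))).length, f.length)
  decreasing_by
    rw [innerB_eq]
    rcases hc : (collect v (flatB tree (x :: rest))).2 with _ | ⟨y, t⟩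
    · rw [collect_nil_out _ _ hc]
      exact Prod.Lex.right _ (by simp [hc])
    · apply Prod.Lex.left
      obtain ⟨h1, h2, h3⟩ := collect_out _ v y (by rw [hc]; exact List.mem_cons_self)
      exact pv_filter_length_lt _ _ _ y (fun k hk => collect_mono _ v k hk)
        (flatB_sub _ _ _ h1) h2 h3

-- the vertices A's BFS can ever look up
inductive Reach (tree : List (Int × List Int)) : Int → Prop
  | zero : Reach tree 0
  | step {x y : Int} {a : List Int} :
      Reach tree x → dget tree x = some a → y ∈ a → Reach tree y

theorem rstep_mono {acc : PySem.Set Int} {z : Int} (p : Int × List Int)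
    (h : acc.contains z = true) : (rstep acc p).contains z = true := by
  unfold rstep
  split
  · exact pv_cmem' ((PySem.Set.mem_update acc p.2 z).2 (Or.inl (pv_cmem h)))
  · exact h

theorem foldl_rstep_mono (l : List (Int × List Int)) :
    ∀ (acc : PySem.Set Int) (z : Int), acc.contains z = true →
    (l.foldl rstep acc).contains z = true := by
  induction l with
  | nil => intro acc z h; exact h
  | cons p t ih => intro acc z h; exact ih (rstep acc p) z (rstep_mono p h)

theorem foldl_rstep_closed (l : List (Int × List Int)) :
    ∀ (acc : PySem.Set Int) (z y : Int) (a : List Int), (z, a) ∈ l →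
    acc.contains z = true → y ∈ a → (l.foldl rstep acc).contains y = true := by
  induction l with
  | nil => intro _ _ _ _ h; cases h
  | cons p t ih =>
    intro acc z y a hmem hz hy
    rcases List.mem_cons.1 hmem with h0 | h1
    · subst h0
      rw [List.foldl_cons]
      apply foldl_rstep_mono
      have hr : rstep acc (z, a) = PySem.Set.update acc a := by unfold rstep; rw [hz]; rfl
      rw [hr]
      exact pv_cmem' ((PySem.Set.mem_update acc a y).2 (Or.inr hy))
    · exact ih (rstep acc p) z y a h1 (rstep_mono p hz) hy

theorem reachIter_succ_mono (tree : List (Int × List Int)) (k : Nat) (z : Int)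
    (h : (reachIter tree k).contains z = true) :
    (reachIter tree (k + 1)).contains z = true :=
  foldl_rstep_mono tree (reachIter tree k) z h

theorem reachIter_le_mono (tree : List (Int × List Int)) {j k : Nat} (hjk : j ≤ k) (z : Int)
    (h : (reachIter tree j).contains z = true) :
    (reachIter tree k).contains z = true := by
  induction k with
  | zero => rw [Nat.le_zero.1 hjk] at h; exact h
  | succ k ih =>
    rcases Nat.lt_or_ge j (k + 1) with hlt | hge
    · exact reachIter_succ_mono tree k z (ih (Nat.lt_succ_iff.1 hlt))
    · rw [Nat.le_antisymm hjk hge] at h; exact h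

theorem foldl_rstep_append (l : List (Int × List Int)) :
    ∀ (acc : PySem.Set Int), ∃ t, l.foldl rstep acc = acc ++ t := by
  induction l with
  | nil => intro acc; exact ⟨[], by simp⟩
  | cons p tl ih =>
    intro acc
    have hstep : ∃ u, rstep acc p = acc ++ u := by
      unfold rstep
      split
      · rw [PySem.Set.update_eq_append_filter]
        exact ⟨_, rfl⟩
      · exact ⟨[], by simp⟩
    obtain ⟨u, hu⟩ := hstep
    obtain ⟨t2, ht2⟩ := ih (rstep acc p)
    exact ⟨u ++ t2, by rw [List.foldl_cons, ht2, hu, List.append_assoc]⟩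

theorem reachIter_stable (tree : List (Int × List Int)) (k : Nat)
    (h : reachStep tree (reachIter tree k) = reachIter tree k) :
    ∀ m, reachIter tree (k + m) = reachIter tree k := by
  intro m
  induction m with
  | zero => rfl
  | succ m ih =>
    show reachStep tree (reachIter tree (k + m)) = reachIter tree k
    rw [ih, h]

theorem foldl_rstep_nodup (l : List (Int × List Int)) :
    ∀ (acc : PySem.Set Int), acc.Nodup → (l.foldl rstep acc).Nodup := by
  induction l with
  | nil => intro acc h; exact h
  | cons p t ih =>
    intro acc h
    apply ih
    unfold rstep
    split
    · exact PySem.Set.nodup_update _ _ h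
    · exact h

theorem reachIter_nodup (tree : List (Int × List Int)) (k : Nat) :
    (reachIter tree k).Nodup := by
  induction k with
  | zero => exact List.nodup_singleton 0
  | succ k ih => exact foldl_rstep_nodup tree (reachIter tree k) ih

theorem foldl_rstep_sub (l : List (Int × List Int)) (tree : List (Int × List Int)) :
    ∀ (acc : PySem.Set Int), (∀ p ∈ l, p ∈ tree) →
    (∀ z, acc.contains z = true → z ∈ pvU tree) →
    ∀ z, (l.foldl rstep acc).contains z = true → z ∈ pvU tree := by
  induction l with
  | nil => intro acc _ hacc z h; exact hacc z h
  | cons p t ih =>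
    intro acc hl hacc z h
    refine ih (rstep acc p) (fun q hq => hl q (List.mem_cons_of_mem _ hq)) ?_ z h
    intro w hw
    unfold rstep at hw
    split at hw
    · rcases (PySem.Set.mem_update acc p.2 w).1 (pv_cmem hw) with h1 | h2
      · exact hacc w (pv_cmem' h1)
      · exact List.mem_cons_of_mem _ (List.mem_flatMap.2 ⟨p, hl p List.mem_cons_self, h2⟩)
    · exact hacc w hw

theorem reachIter_sub (tree : List (Int × List Int)) (k : Nat) :
    ∀ z, (reachIter tree k).contains z = true → z ∈ pvU tree := by
  induction k with
  | zero =>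
    intro z h
    have : z ∈ ([0] : List Int) := pv_cmem h
    rw [List.mem_singleton.1 this]
    exact List.mem_cons_self
  | succ k ih => exact foldl_rstep_sub tree tree (reachIter tree k) (fun p hp => hp) ih

theorem pv_nodup_length_le {l u : List Int} (hn : l.Nodup) (hsub : ∀ z ∈ l, z ∈ u) :
    l.length ≤ u.dedup.length := by
  have h1 : l.toFinset.card = l.length := List.toFinset_card_of_nodup hn
  have h2 : u.toFinset.card = u.dedup.length := List.card_toFinset u
  rw [← h1, ← h2]
  apply Finset.card_le_card
  intro z hz
  exact List.mem_toFinset.2 (hsub z (List.mem_toFinset.1 hz))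

theorem reachIter_grow (tree : List (Int × List Int)) :
    ∀ k : Nat, (reachIter tree k).length ≥ k + 1 ∨
      ∃ j, reachStep tree (reachIter tree j) = reachIter tree j ∧ j ≤ k := by
  intro k
  induction k with
  | zero => left; exact le_refl 1
  | succ k ih =>
    rcases ih with hlen | ⟨j, hj, hjk⟩
    · by_cases hfix : reachStep tree (reachIter tree k) = reachIter tree k
      · right; exact ⟨k, hfix, Nat.le_succ k⟩
      · left
        obtain ⟨t, ht⟩ := foldl_rstep_append tree (reachIter tree k)
        have htne : t ≠ [] := by
          intro h0
          rw [h0, List.append_nil] at ht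
          exact hfix ht
        have hlen1 : (reachIter tree (k + 1)) = reachIter tree k ++ t := ht
        rw [hlen1, List.length_append]
        have : 1 ≤ t.length := Nat.one_le_iff_ne_zero.2 (fun h0 => htne (List.eq_nil_of_length_eq_zero h0))
        omega
    · right; exact ⟨j, hj, hjk.trans (Nat.le_succ k)⟩

theorem reachSet_fix (tree : List (Int × List Int)) :
    reachStep tree (reachSet tree) = reachSet tree := by
  rcases reachIter_grow tree ((pvU tree).dedup.length) with hlen | ⟨j, hj, hjk⟩
  · exfalso
    have hle := pv_nodup_length_le (reachIter_nodup tree ((pvU tree).dedup.length))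
      (fun z hz => reachIter_sub tree _ z (pv_cmem' hz))
    unfold reachSet at *
    omega
  · have heq : reachSet tree = reachIter tree j := by
      unfold reachSet
      have := reachIter_stable tree j hj ((pvU tree).dedup.length - j)
      rw [← Nat.add_sub_cancel' hjk]
      exact this
    rw [heq, hj]

theorem reach_in_reachSet (tree : List (Int × List Int)) :
    ∀ x, Reach tree x → (reachSet tree).contains x = true := by
  intro x hx
  induction hx with
  | zero =>
    apply reachIter_le_mono tree (Nat.zero_le _)
    exact pv_cmem' List.mem_cons_self
  | step hx hd hy ih =>
    rw [← reachSet_fix tree]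
    exact foldl_rstep_closed tree (reachSet tree) _ _ _ (dget_mem hd) ih hy

-- A's appended level-(L+1) queue segment produced while draining one level-L segment
def nextSegA (tree : List (Int × List Int)) : PySem.Set Int → List Int → List Int
  | _, [] => []
  | v, x :: t =>
    if v.contains x then nextSegA tree v t
    else ((dget tree x).getD []).filter (fun nb => !((v.add x).contains nb)) ++ nextSegA tree (v.add x) t

-- equation lemmas for the WF-recursive loops
theorem loopA_nil (tree : List (Int × List Int)) (v : PySem.Set Int) (e o : Int) :
    loopA tree [] v e o = (e, o) := by rw [loopA]

theorem loopA_cons_t (tree : List (Int × List Int)) {v : PySem.Set Int} {x : Int} (l : Int)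
    (q : List (Int × Int)) (e o : Int) (hx : v.contains x = true) :
    loopA tree ((x, l) :: q) v e o = loopA tree q v e o := by
  rw [loopA, dif_pos hx]

theorem loopA_cons_f (tree : List (Int × List Int)) {v : PySem.Set Int} {x : Int} {adj : List Int}
    (l : Int) (q : List (Int × Int)) (e o : Int) (hx : v.contains x = false)
    (h : dget tree x = some adj) :
    loopA tree ((x, l) :: q) v e o =
      loopA tree (q ++ (adj.filter (fun nb => !((v.add x).contains nb))).map (fun nb => (nb, l + 1)))
        (v.add x)
        (if PySem.Int.mod l 2 == 0 then e + 1 else e)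
        (if PySem.Int.mod l 2 == 0 then o else o + 1) := by
  rw [loopA, dif_neg (ne_true_of_eq_false hx)]
  split
  · rename_i heq
    split
    · rename_i hd; rw [h] at hd; simp at hd
    · rename_i a hd
      rw [h] at hd
      injection hd with hd2
      subst hd2
      rfl
  · rename_i heq
    split
    · rename_i hd; rw [h] at hd; simp at hd
    · rename_i a hd
      rw [h] at hd
      injection hd with hd2
      subst hd2
      rfl

theorem loopB_nil (tree : List (Int × List Int)) (v : PySem.Set Int) (p : Int) (c : Int × Int) :
    loopB tree [] v p c = c := by rw [loopB]

theorem loopB_cons (tree : List (Int × List Int)) (x : Int) (rest : List Int)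
    (v : PySem.Set Int) (parity e o : Int) :
    loopB tree (x :: rest) v parity (e, o) =
      loopB tree (innerB tree (x :: rest) v []).2 (innerB tree (x :: rest) v []).1 (1 - parity)
        (if parity == 0 then e + ((x :: rest).length : Int) else e,
         if parity == 0 then o else o + ((x :: rest).length : Int)) := by
  rw [loopB]

theorem segA (tree : List (Int × List Int)) (L : Int) (cur : List Int) :
    ∀ (rest : List (Int × Int)) (v : PySem.Set Int) (e o : Int),
    (∀ x ∈ cur, v.contains x = false → (dget tree x).isSome = true) →
    loopA tree (cur.map (fun m => (m, L)) ++ rest) v e o =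
    loopA tree (rest ++ (nextSegA tree v cur).map (fun m => (m, L + 1)))
      (collect v cur).1
      (if PySem.Int.mod L 2 == 0 then e + ((collect v cur).2.length : Int) else e)
      (if PySem.Int.mod L 2 == 0 then o else o + ((collect v cur).2.length : Int)) := by
  induction cur with
  | nil =>
    intro rest v e o _
    simp only [List.map_nil, List.nil_append, nextSegA, List.append_nil]
    have hc : collect v [] = (v, []) := rfl
    rw [hc]
    split <;> simp
  | cons x t ih =>
    intro rest v e o hkeys
    cases hx : v.contains x with
    | true =>
      have hmap : (x :: t).map (fun m => (m, L)) ++ rest = (x, L) :: (t.map (fun m => (m, L)) ++ rest) := rfl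
      rw [hmap, loopA_cons_t tree L _ e o hx,
          ih rest v e o (fun y hy => hkeys y (List.mem_cons_of_mem _ hy)),
          collect_cons_t t hx]
      have hns : nextSegA tree v (x :: t) = nextSegA tree v t := by
        simp only [nextSegA, hx]; rfl
      rw [hns]
    | false =>
      obtain ⟨adj, hadj⟩ : ∃ a, dget tree x = some a := by
        have h1 := hkeys x List.mem_cons_self hx
        cases hd : dget tree x with
        | none => rw [hd] at h1; cases h1
        | some a => exact ⟨a, rfl⟩
      have hmap : (x :: t).map (fun m => (m, L)) ++ rest = (x, L) :: (t.map (fun m => (m, L)) ++ rest) := rfl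
      rw [hmap, loopA_cons_f tree L _ e o hx hadj, List.append_assoc,
          ih (rest ++ (adj.filter (fun nb => !((v.add x).contains nb))).map (fun nb => (nb, L + 1)))
             (v.add x) _ _ (fun y hy hyv => hkeys y (List.mem_cons_of_mem _ hy) (pv_contains_add_false hyv))]
      have hns : nextSegA tree v (x :: t) =
          adj.filter (fun nb => !((v.add x).contains nb)) ++ nextSegA tree (v.add x) t := by
        simp only [nextSegA, hx, hadj]; rfl
      rw [hns, collect_cons_f t hx, List.map_append, ← List.append_assoc]
      have hE : (if PySem.Int.mod L 2 == 0 then e + (((x :: (collect (v.add x) t).2)).length : Int) else e)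
          = (if PySem.Int.mod L 2 == 0 then (if PySem.Int.mod L 2 == 0 then e + 1 else e) + (((collect (v.add x) t).2).length : Int) else (if PySem.Int.mod L 2 == 0 then e + 1 else e)) := by
        split_ifs <;> simp only [List.length_cons] <;> push_cast <;> ring
      have hO : (if PySem.Int.mod L 2 == 0 then o else o + (((x :: (collect (v.add x) t).2)).length : Int))
          = (if PySem.Int.mod L 2 == 0 then (if PySem.Int.mod L 2 == 0 then o else o + 1) else (if PySem.Int.mod L 2 == 0 then o else o + 1) + (((collect (v.add x) t).2).length : Int)) := by
        split_ifs <;> simp only [List.length_cons] <;> push_cast <;> ring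
      rw [hE, hO]

theorem nextSegA_nil (tree : List (Int × List Int)) (cur : List Int) :
    ∀ (v : PySem.Set Int), (collect v cur).2 = [] → nextSegA tree v cur = [] := by
  induction cur with
  | nil => intro v _; rfl
  | cons x t ih =>
    intro v h
    cases hx : v.contains x with
    | true =>
      rw [collect_cons_t t hx] at h
      simp only [nextSegA, hx]
      exact ih v h
    | false => rw [collect_cons_f t hx] at h; cases h

theorem nextSegA_src (tree : List (Int × List Int)) (cur : List Int) :
    ∀ (v : PySem.Set Int) (y : Int), y ∈ nextSegA tree v cur →
      ∃ x ∈ cur, ∃ a, dget tree x = some a ∧ y ∈ a := by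
  induction cur with
  | nil => intro v y h; cases h
  | cons x t ih =>
    intro v y h
    cases hx : v.contains x with
    | true =>
      have hns : nextSegA tree v (x :: t) = nextSegA tree v t := by
        simp only [nextSegA, hx]; rfl
      rw [hns] at h
      obtain ⟨z, hz, a, ha, hya⟩ := ih v y h
      exact ⟨z, List.mem_cons_of_mem _ hz, a, ha, hya⟩
    | false =>
      have hns : nextSegA tree v (x :: t) =
          ((dget tree x).getD []).filter (fun nb => !((v.add x).contains nb)) ++ nextSegA tree (v.add x) t := by
        simp only [nextSegA, hx]; rfl
      rw [hns] at h
      rcases List.mem_append.1 h with h1 | h2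
      · have hy : y ∈ (dget tree x).getD [] := List.mem_of_mem_filter h1
        cases hd : dget tree x with
        | none => rw [hd] at hy; cases hy
        | some a =>
          rw [hd] at hy
          exact ⟨x, List.mem_cons_self, a, hd, by simpa using hy⟩
      · obtain ⟨z, hz, a, ha, hya⟩ := ih (v.add x) y h2
        exact ⟨z, List.mem_cons_of_mem _ hz, a, ha, hya⟩

theorem nextSeg_collect (tree : List (Int × List Int)) (cur : List Int) :
    ∀ (v w : PySem.Set Int),
    (∀ k, (collect v cur).1.contains k = true → w.contains k = true) →
    collect w (nextSegA tree v cur) = collect w (flatB tree (collect v cur).2) := by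
  induction cur with
  | nil => intro v w _; rfl
  | cons x t ih =>
    intro v w hw
    cases hx : v.contains x with
    | true =>
      rw [collect_cons_t t hx] at hw ⊢
      have hns : nextSegA tree v (x :: t) = nextSegA tree v t := by
        simp only [nextSegA, hx]; rfl
      rw [hns]
      exact ih v w hw
    | false =>
      rw [collect_cons_f t hx] at hw ⊢
      have hw' : ∀ k, (collect (v.add x) t).1.contains k = true → w.contains k = true := hw
      have hns : nextSegA tree v (x :: t) =
          ((dget tree x).getD []).filter (fun nb => !((v.add x).contains nb)) ++ nextSegA tree (v.add x) t := by
        simp only [nextSegA, hx]; rfl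
      have hflat : flatB tree (x :: (collect (v.add x) t).2) =
          (dget tree x).getD [] ++ flatB tree (collect (v.add x) t).2 := by
        simp [flatB]
      rw [hns, hflat, collect_append, collect_append]
      have hfilt : collect w (((dget tree x).getD []).filter (fun nb => !((v.add x).contains nb)))
          = collect w ((dget tree x).getD []) := by
        have : ∀ (l : List Int) (u : PySem.Set Int),
            (∀ y ∈ l, (v.add x).contains y = true → u.contains y = true) →
            collect u (l.filter (fun nb => !((v.add x).contains nb))) = collect u l := by
          intro l
          induction l with
          | nil => intro u _; rfl
          | cons z zs ihz =>
            intro u hu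
            cases hz : (v.add x).contains z with
            | true =>
              have hz2 : u.contains z = true := hu z List.mem_cons_self hz
              rw [List.filter_cons_of_neg (by show ¬((!((v.add x).contains z)) = true); rw [hz]; decide)]
              rw [collect_cons_t zs hz2]
              exact ihz u (fun y hy => hu y (List.mem_cons_of_mem _ hy))
            | false =>
              rw [List.filter_cons_of_pos (by show (!((v.add x).contains z)) = true; rw [hz]; rfl)]
              cases hzu : u.contains z with
              | true =>
                rw [collect_cons_t _ hzu, collect_cons_t _ hzu]
                exact ihz u (fun y hy => hu y (List.mem_cons_of_mem _ hy))
              | false =>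
                rw [collect_cons_f _ hzu, collect_cons_f _ hzu]
                have := ihz (u.add z) (fun y hy hyx => pv_contains_add_of z (hu y (List.mem_cons_of_mem _ hy) hyx))
                rw [this]
        apply this
        intro y _ hy
        exact hw y (collect_mono t (v.add x) y hy)
      rw [hfilt]
      have hrec := ih (v.add x) ((collect w ((dget tree x).getD [])).1)
        (fun k hk => collect_mono _ w k (hw k hk))
      rw [hrec]

theorem pv_mem_keys_isSome {tree : List (Int × List Int)} {x : Int}
    (h : x ∈ tree.map Prod.fst) : (dget tree x).isSome = true := by
  induction tree with
  | nil => cases h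
  | cons p t ih =>
    obtain ⟨k, a⟩ := p
    by_cases hk : k == x
    · simp [dget, hk]
    · simp only [List.map_cons, List.mem_cons] at h
      rcases h with h0 | h1
      · simp [h0] at hk
      · simp only [dget, hk, Bool.false_eq_true, if_false]
        exact ih h1

theorem dget_isSome_mem_keys {tree : List (Int × List Int)} {x : Int}
    (h : (dget tree x).isSome = true) : x ∈ tree.map Prod.fst := by
  cases hd : dget tree x with
  | none => rw [hd] at h; cases h
  | some a => exact List.mem_map.2 ⟨(x, a), dget_mem hd, rfl⟩

theorem pv_mod_flip (L : Int) : 1 - PySem.Int.mod L 2 = PySem.Int.mod (L + 1) 2 := by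
  rw [PySem.Int.mod_eq_emod_of_pos (by norm_num : (0:Int) < 2),
      PySem.Int.mod_eq_emod_of_pos (by norm_num : (0:Int) < 2)]
  omega

theorem rounds (tree : List (Int × List Int)) (n : Nat) :
    ∀ (cur : List Int) (v : PySem.Set Int) (L e o : Int),
    (∀ x, Reach tree x → (dget tree x).isSome = true) →
    (∀ x ∈ cur, Reach tree x) →
    n = ((tree.map Prod.fst).filter (fun k => !(v.contains k))).length →
    loopA tree (cur.map (fun m => (m, L))) v e o =
    loopB tree (collect v cur).2 (collect v cur).1 (PySem.Int.mod L 2) (e, o) := by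
  induction n using Nat.strong_induction_on with
  | _ n IHn =>
  intro cur v L e o hRk hcur hn
  have hcurS : ∀ x ∈ cur, (dget tree x).isSome = true := fun x hx => hRk x (hcur x hx)
  have hseg := segA tree L cur [] v e o (fun x hx _ => hcurS x hx)
  simp only [List.append_nil, List.nil_append] at hseg
  rw [hseg]
  cases hc : (collect v cur).2 with
  | nil =>
    rw [collect_nil_out cur v hc, nextSegA_nil tree cur v hc]
    simp only [List.map_nil, loopA_nil, List.length_nil, Nat.cast_zero, add_zero, ite_self]
    rw [loopB_nil]
  | cons y t2 =>
    set W := (collect v cur).1 with hW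
    rw [loopB_cons, innerB_eq]
    have hWid : ∀ k, (collect v cur).1.contains k = true → W.contains k = true := fun k hk => hk
    have hnsc := nextSeg_collect tree cur v W hWid
    rw [hc] at hnsc
    rw [List.nil_append, ← hnsc]
    obtain ⟨hy1, hy2, hy3⟩ := collect_out cur v y (by rw [hc]; exact List.mem_cons_self)
    have hlt : ((tree.map Prod.fst).filter (fun k => !(W.contains k))).length < n := by
      rw [hn]
      exact pv_filter_length_lt _ _ _ y (fun k hk => collect_mono cur v k hk)
        (dget_isSome_mem_keys (hcurS y hy1)) hy2 hy3
    have hcur' : ∀ x ∈ nextSegA tree v cur, Reach tree x := by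
      intro x hx
      obtain ⟨z, hz, a, ha, hxa⟩ := nextSegA_src tree cur v x hx
      exact Reach.step (hcur z hz) ha hxa
    have hIH := IHn _ hlt (nextSegA tree v cur) W (L + 1)
      (if PySem.Int.mod L 2 == 0 then e + ((y :: t2).length : Int) else e)
      (if PySem.Int.mod L 2 == 0 then o else o + ((y :: t2).length : Int))
      hRk hcur' rfl
    rw [← pv_mod_flip] at hIH
    rw [← hIH]

-- ---------- walks and exact BFS levels ----------
inductive Walk (tree : List (Int × List Int)) : Int → Nat → Prop
  | zero : Walk tree 0 0
  | step {u v : Int} {a : List Int} {n : Nat} :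
      Walk tree u n → dget tree u = some a → v ∈ a → Walk tree v (n + 1)

def Lvl (tree : List (Int × List Int)) (x : Int) (k : Nat) : Prop :=
  Walk tree x k ∧ ∀ j, Walk tree x j → k ≤ j

theorem walk_zero_eq {tree : List (Int × List Int)} {x : Int} (h : Walk tree x 0) : x = 0 := by
  cases h; rfl

theorem walk_to_lvl {tree : List (Int × List Int)} {x : Int} :
    ∀ n, Walk tree x n → ∃ k, k ≤ n ∧ Lvl tree x k := by
  intro n
  induction n using Nat.strong_induction_on generalizing x with
  | _ n IH =>
  intro hw
  by_cases h : ∃ j, j < n ∧ Walk tree x j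
  · obtain ⟨j, hj, hwj⟩ := h
    obtain ⟨k, hk, hlvl⟩ := IH j hj hwj
    exact ⟨k, by omega, hlvl⟩
  · refine ⟨n, le_refl n, hw, ?_⟩
    intro j hwj
    by_contra hlt
    exact h ⟨j, by omega, hwj⟩

theorem lvl_pred {tree : List (Int × List Int)} {x : Int} {k : Nat}
    (h : Lvl tree x (k + 1)) :
    ∃ u a, Lvl tree u k ∧ dget tree u = some a ∧ x ∈ a := by
  obtain ⟨hw, hmin⟩ := h
  cases hw with
  | step hwu hd hm =>
    rename_i u a
    obtain ⟨j, hj, hlvl⟩ := walk_to_lvl _ hwu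
    have hjk : j = k := by
      by_contra hne
      have hlt : j < k := by omega
      have : Walk tree x (j + 1) := Walk.step hlvl.1 hd hm
      have := hmin (j + 1) this
      omega
    subst hjk
    exact ⟨u, a, hlvl, hd, hm⟩

theorem no_lvl_ge {tree : List (Int × List Int)} {k : Nat}
    (h : ∀ y, ¬ Lvl tree y k) : ∀ j, k ≤ j → ∀ y, ¬ Lvl tree y j := by
  intro j
  induction j with
  | zero => intro hj y; rw [Nat.le_zero.1 hj] at h; exact h y
  | succ j ih =>
    intro hj y hy
    rcases Nat.lt_or_ge k (j + 1) with hlt | hge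
    · obtain ⟨u, a, hu, _, _⟩ := lvl_pred hy
      exact ih (by omega) u hu
    · rw [Nat.le_antisymm hj hge] at h
      exact h y hy

-- ---------- the fixpoint of B's sweeps assigns exactly the BFS level ----------
theorem DLe_antisymm_get? {a b : PySem.Dict Int Int} (h1 : DLe a b) (h2 : DLe b a) :
    ∀ k, a.get? k = b.get? k := by
  intro k
  cases ha : a.get? k with
  | none =>
    cases hb : b.get? k with
    | none => rfl
    | some v =>
      obtain ⟨v', hv', _⟩ := h2 k v hb
      rw [ha] at hv'; cases hv'
  | some v =>
    obtain ⟨v', hv', hle'⟩ := h1 k v ha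
    obtain ⟨v'', hv'', hle''⟩ := h2 k v' hv'
    rw [ha] at hv''
    injection hv'' with hv''
    rw [hv']
    congr 1
    omega

theorem relax_fold_post (du : Int) : ∀ (l : List Int) (d : PySem.Dict Int Int),
    ∀ v ∈ l, ∃ dv, (l.foldl (relax1 du) d).get? v = some dv ∧ dv ≤ du + 1 := by
  intro l
  induction l with
  | nil => intro d v hv; cases hv
  | cons x t ih =>
    intro d v hv
    rw [List.foldl_cons]
    rcases List.mem_cons.1 hv with rfl | hvt
    · -- after relax1 the head's value is ≤ du + 1, and later relaxations only lower it
      have hpost : ∃ dv, (relax1 du d v).get? v = some dv ∧ dv ≤ du + 1 := by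
        cases hg : d.get? v with
        | none =>
          rw [relax1_none du hg]
          exact ⟨du + 1, PySem.Dict.get?_insert_self d v (du + 1), le_refl _⟩
        | some dv =>
          by_cases hlt : du + 1 < dv
          · rw [relax1_lt hg hlt]
            exact ⟨du + 1, PySem.Dict.get?_insert_self d v (du + 1), le_refl _⟩
          · rw [relax1_ge hg hlt]
            exact ⟨dv, hg, by omega⟩
      obtain ⟨dv, hdv, hle⟩ := hpost
      obtain ⟨dv', hdv', hle'⟩ := foldl_relax1_DLe t du (relax1 du d v) v dv hdv
      exact ⟨dv', hdv', by omega⟩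
    · exact ih (relax1 du d x) v hvt

theorem sweep_fix_closed (tree : List (Int × List Int)) (D : PySem.Dict Int Int)
    (hfix : sweepB tree D = D) :
    ∀ u du, D.get? u = some du → ∀ v ∈ (dget tree u).getD [],
      ∃ dv, D.get? v = some dv ∧ dv ≤ du + 1 := by
  intro u du hu v hv
  cases hadj : dget tree u with
  | none => rw [hadj] at hv; cases hv
  | some adj =>
    rw [hadj] at hv
    simp only [Option.getD_some] at hv
    have hukey : u ∈ D.keys := by
      rw [← PySem.Dict.contains_iff_mem_keys, PySem.Dict.contains_eq_isSome_get?, hu]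
      rfl
    obtain ⟨l1, l2, hkeys⟩ := List.append_of_mem hukey
    set f : PySem.Dict Int Int → Int → PySem.Dict Int Int :=
      fun d u =>
        match d.get? u with
        | none => d
        | some du =>
          match dget tree u with
          | none => d
          | some adj => adj.foldl (relax1 du) d with hf
    have hsweep : sweepB tree D = l2.foldl f (f (l1.foldl f D) u) := by
      show List.foldl f D D.keys = _
      rw [hkeys, List.foldl_append, List.foldl_cons]
    set m1 := l1.foldl f D with hm1
    have hDLe1 : DLe D m1 := sweepB_DLe tree l1 D
    have hDLe2 : DLe m1 (f m1 u) := by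
      rw [hf]
      cases hg : m1.get? u with
      | none => simp only [hg]; exact DLe_refl m1
      | some du' =>
        simp only [hg]
        cases dget tree u with
        | none => exact DLe_refl m1
        | some adj' => exact foldl_relax1_DLe _ du' m1
    have hDLe3 : DLe (f m1 u) (sweepB tree D) := by
      rw [hsweep]
      exact sweepB_DLe tree l2 _
    have hDLeBack : DLe m1 D := by
      have := DLe_trans hDLe2 hDLe3
      rw [hfix] at this
      exact this
    have hgeq : ∀ k, D.get? k = m1.get? k := DLe_antisymm_get? hDLe1 hDLeBack
    have hgu : m1.get? u = some du := by rw [← hgeq u]; exact hu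
    have hstep : f m1 u = adj.foldl (relax1 du) m1 := by
      rw [hf]
      simp only [hgu, hadj]
    obtain ⟨dv, hdv, hle⟩ := relax_fold_post du adj m1 v hv
    rw [← hstep] at hdv
    obtain ⟨dv', hdv', hle'⟩ := hDLe3 v dv hdv
    rw [hfix] at hdv'
    exact ⟨dv', hdv', by omega⟩

-- soundness: every entry of any dict produced by the sweeps is the length of a real walk
def SoundD (tree : List (Int × List Int)) (d : PySem.Dict Int Int) : Prop :=
  ∀ k v, d.get? k = some v → ∃ n : Nat, v = (n : Int) ∧ Walk tree k n

theorem foldl_relax1_sound {tree : List (Int × List Int)} {du : Int} {n : Nat}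
    (hdu : du = (n : Int)) :
    ∀ (l : List Int) (d : PySem.Dict Int Int), SoundD tree d →
    (∀ v ∈ l, Walk tree v (n + 1)) → SoundD tree (l.foldl (relax1 du) d) := by
  intro l
  induction l with
  | nil => intro d hd _; exact hd
  | cons x t ih =>
    intro d hd hl
    rw [List.foldl_cons]
    refine ih (relax1 du d x) ?_ (fun v hv => hl v (List.mem_cons_of_mem _ hv))
    intro k v hk
    have hins : ∀ (hk2 : (d.insert x (du + 1)).get? k = some v), ∃ m : Nat, v = (m : Int) ∧ Walk tree k m := by
      intro hk2
      by_cases hkx : k = x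
      · subst hkx
        rw [PySem.Dict.get?_insert_self] at hk2
        injection hk2 with hk2
        exact ⟨n + 1, by omega, hl k List.mem_cons_self⟩
      · rw [PySem.Dict.get?_insert_of_ne d (du + 1) hkx] at hk2
        exact hd k v hk2
    cases hg : d.get? x with
    | none =>
      rw [relax1_none du hg] at hk
      exact hins hk
    | some dv =>
      by_cases hlt : du + 1 < dv
      · rw [relax1_lt hg hlt] at hk
        exact hins hk
      · rw [relax1_ge hg hlt] at hk
        exact hd k v hk

theorem sweepB_sound_aux (tree : List (Int × List Int)) :
    ∀ (l : List Int) (d : PySem.Dict Int Int), SoundD tree d →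
    SoundD tree (l.foldl (fun d u =>
      match d.get? u with
      | none => d
      | some du =>
        match dget tree u with
        | none => d
        | some adj => adj.foldl (relax1 du) d) d) := by
  intro l
  induction l with
  | nil => intro d hd; exact hd
  | cons u t ih =>
    intro d hd
    rw [List.foldl_cons]
    cases hg : d.get? u with
    | none => simp only [hg]; exact ih d hd
    | some du =>
      simp only [hg]
      cases hadj : dget tree u with
      | none => exact ih d hd
      | some adj =>
        obtain ⟨n, hn, hwalk⟩ := hd u du hg
        refine ih _ (foldl_relax1_sound hn adj d hd ?_)
        intro v hv
        exact Walk.step hwalk hadj hv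

theorem sweepB_sound (tree : List (Int × List Int)) (d : PySem.Dict Int Int)
    (hd : SoundD tree d) : SoundD tree (sweepB tree d) := sweepB_sound_aux tree d.keys d hd

-- properties of the whole fixpoint loop, by its own recursion
theorem bfLoop_fix (tree : List (Int × List Int)) : ∀ (d : PySem.Dict Int Int)
    (hnd : d.keys.Nodup), sweepB tree (bfLoop tree d hnd) = bfLoop tree d hnd := by
  intro d hnd
  fun_induction bfLoop tree d hnd with
  | case1 d hnd h => exact h
  | case2 d hnd h ih => exact ih

theorem bfLoop_DLe (tree : List (Int × List Int)) : ∀ (d : PySem.Dict Int Int)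
    (hnd : d.keys.Nodup), DLe d (bfLoop tree d hnd) := by
  intro d hnd
  fun_induction bfLoop tree d hnd with
  | case1 d hnd h => exact DLe_refl d
  | case2 d hnd h ih =>
    exact DLe_trans (sweepB_DLe' tree d) ih

theorem bfLoop_sound (tree : List (Int × List Int)) : ∀ (d : PySem.Dict Int Int)
    (hnd : d.keys.Nodup), SoundD tree d → SoundD tree (bfLoop tree d hnd) := by
  intro d hnd
  fun_induction bfLoop tree d hnd with
  | case1 d hnd h => intro hs; exact hs
  | case2 d hnd h ih =>
    intro hs
    exact ih (sweepB_sound tree d hs)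

theorem bfLoop_nodup (tree : List (Int × List Int)) (d : PySem.Dict Int Int)
    (hnd : d.keys.Nodup) : (bfLoop tree d hnd).keys.Nodup := by
  fun_induction bfLoop tree d hnd with
  | case1 d hnd h => exact hnd
  | case2 d hnd h ih => exact ih

-- the initial dict {0: 0}
theorem init_get? (k : Int) :
    ((PySem.Dict.empty : PySem.Dict Int Int).insert 0 0).get? k
      = if k = 0 then some 0 else none := by
  by_cases hk : k = 0
  · subst hk; rw [if_pos rfl]; exact PySem.Dict.get?_insert_self _ 0 0
  · rw [if_neg hk, PySem.Dict.get?_insert_of_ne _ 0 hk]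
    rfl

theorem bf_char (tree : List (Int × List Int)) :
    ∀ x dv, (bfLoop tree ((PySem.Dict.empty : PySem.Dict Int Int).insert 0 0) (by decide)).get? x = some dv
      ↔ ∃ k : Nat, dv = (k : Int) ∧ Lvl tree x k := by
  set D := bfLoop tree ((PySem.Dict.empty : PySem.Dict Int Int).insert 0 0) (by decide) with hD
  have hsound : SoundD tree D := by
    apply bfLoop_sound
    intro k v hk
    rw [init_get?] at hk
    by_cases h0 : k = 0
    · subst h0
      rw [if_pos rfl] at hk
      injection hk with hk
      exact ⟨0, by omega, Walk.zero⟩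
    · rw [if_neg h0] at hk; cases hk
  have hfix : sweepB tree D = D := bfLoop_fix tree _ _
  have hDLe : DLe ((PySem.Dict.empty : PySem.Dict Int Int).insert 0 0) D := bfLoop_DLe tree _ _
  have hD0 : D.get? 0 = some 0 := by
    obtain ⟨v, hv, hle⟩ := hDLe 0 0 (by rw [init_get?]; rfl)
    obtain ⟨n, hn, _⟩ := hsound 0 v hv
    have : v = 0 := by omega
    rw [this] at hv
    exact hv
  have hub : ∀ x n, Walk tree x n → ∃ dv, D.get? x = some dv ∧ dv ≤ (n : Int) := by
    intro x n hw
    induction hw with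
    | zero => exact ⟨0, hD0, by omega⟩
    | step hwu hd hm ih =>
      obtain ⟨du, hdu, hle⟩ := ih
      obtain ⟨dv, hdv, hle'⟩ := sweep_fix_closed tree D hfix _ du hdu _ (by rw [hd]; simpa)
      exact ⟨dv, hdv, by push_cast; omega⟩
  intro x dv
  constructor
  · intro hx
    obtain ⟨n, hn, hw⟩ := hsound x dv hx
    obtain ⟨k, hk, hlvl⟩ := walk_to_lvl n hw
    obtain ⟨dv', hdv', hle'⟩ := hub x k hlvl.1
    rw [hx] at hdv'
    injection hdv' with hdv'
    have hnk : k ≤ n := hk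
    have : dv = (k : Int) := by
      have h2 := hlvl.2 n hw
      omega
    exact ⟨k, this, hlvl⟩
  · intro ⟨k, hk, hlvl⟩
    obtain ⟨dv', hdv', hle'⟩ := hub x k hlvl.1
    obtain ⟨n, hn, hw⟩ := hsound x dv' hdv'
    have := hlvl.2 n hw
    have : dv' = (k : Int) := by omega
    rw [this] at hdv'
    rw [hk]
    exact hdv'

-- ---------- the ghost's frontier invariant: level-k frontier = vertices of BFS level k ----------
theorem collect_nodup (l : List Int) : ∀ (v : PySem.Set Int), (collect v l).2.Nodup := by
  induction l with
  | nil => intro v; simp [collect]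
  | cons x t ih =>
    intro v
    cases hx : v.contains x with
    | true => rw [collect_cons_t t hx]; exact ih v
    | false =>
      rw [collect_cons_f t hx]
      refine List.Nodup.cons ?_ (ih (v.add x))
      intro hmem
      obtain ⟨_, h2, _⟩ := collect_out t (v.add x) x hmem
      rw [pv_contains_add_self v x] at h2
      cases h2

theorem collect_complete (l : List Int) : ∀ (v : PySem.Set Int) (x : Int),
    x ∈ l → v.contains x = false → x ∈ (collect v l).2 := by
  induction l with
  | nil => intro v x hx _; cases hx
  | cons y t ih =>
    intro v x hx hvx
    cases hy : v.contains y with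
    | true =>
      rw [collect_cons_t t hy]
      have hxy : x ≠ y := by intro h; rw [h, hy] at hvx; cases hvx
      exact ih v x (by rcases List.mem_cons.1 hx with h | h; exact absurd h hxy; exact h) hvx
    | false =>
      rw [collect_cons_f t hy]
      by_cases hxy : x = y
      · subst hxy; exact List.mem_cons_self
      · refine List.mem_cons_of_mem _ (ih (v.add y) x ?_ ?_)
        · rcases List.mem_cons.1 hx with h | h; exact absurd h hxy; exact h
        · cases hc : (v.add y).contains x with
          | false => rfl
          | true =>
            exfalso
            rcases (PySem.Set.mem_add v y x).1 (pv_cmem hc) with h | h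
            · rw [pv_cmem' h] at hvx; cases hvx
            · exact hxy h

theorem collect_set_mem (l : List Int) : ∀ (v : PySem.Set Int) (x : Int),
    (collect v l).1.contains x = true ↔ (v.contains x = true ∨ x ∈ l) := by
  induction l with
  | nil => intro v x; simp [collect]
  | cons y t ih =>
    intro v x
    cases hy : v.contains y with
    | true =>
      rw [collect_cons_t t hy, ih v x]
      constructor
      · rintro (h | h)
        · exact Or.inl h
        · exact Or.inr (List.mem_cons_of_mem _ h)
      · rintro (h | h)
        · exact Or.inl h
        · rcases List.mem_cons.1 h with rfl | h2
          · exact Or.inl hy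
          · exact Or.inr h2
    | false =>
      rw [collect_cons_f t hy]
      show ((collect (v.add y) t).1.contains x = true) ↔ _
      rw [ih (v.add y) x]
      constructor
      · rintro (h | h)
        · rcases (PySem.Set.mem_add v y x).1 (pv_cmem h) with h2 | h2
          · exact Or.inl (pv_cmem' h2)
          · exact Or.inr (h2 ▸ List.mem_cons_self)
        · exact Or.inr (List.mem_cons_of_mem _ h)
      · rintro (h | h)
        · exact Or.inl (pv_contains_add_of y h)
        · rcases List.mem_cons.1 h with rfl | h2
          · exact Or.inl (pv_contains_add_self v x)
          · exact Or.inr h2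

theorem mem_flatB (tree : List (Int × List Int)) (F : List Int) (x : Int) :
    x ∈ flatB tree F ↔ ∃ u, u ∈ F ∧ ∃ adj, dget tree u = some adj ∧ x ∈ adj := by
  unfold flatB
  rw [List.mem_flatMap]
  constructor
  · rintro ⟨u, hu, hx⟩
    cases hd : dget tree u with
    | none => rw [hd] at hx; cases hx
    | some adj =>
      rw [hd] at hx
      exact ⟨u, hu, adj, hd, by simpa using hx⟩
  · rintro ⟨u, hu, adj, hd, hx⟩
    exact ⟨u, hu, by rw [hd]; simpa using hx⟩

def GInv (tree : List (Int × List Int)) (k : Nat) (F : List Int) (V : PySem.Set Int) : Prop :=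
  F.Nodup ∧ (∀ x, x ∈ F ↔ Lvl tree x k) ∧
    (∀ x, V.contains x = true ↔ ∃ j, j ≤ k ∧ Walk tree x j)

theorem GInv_step (tree : List (Int × List Int)) (k : Nat) (F : List Int) (V : PySem.Set Int)
    (h : GInv tree k F V) :
    GInv tree (k + 1) (collect V (flatB tree F)).2 (collect V (flatB tree F)).1 := by
  obtain ⟨g1, g2, g3⟩ := h
  refine ⟨collect_nodup _ V, ?_, ?_⟩
  · intro x
    constructor
    · intro hx
      obtain ⟨h1, h2, _⟩ := collect_out _ V x hx
      obtain ⟨u, hu, adj, hd, hxa⟩ := (mem_flatB tree F x).1 h1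
      have hw : Walk tree x (k + 1) := Walk.step ((g2 u).1 hu).1 hd hxa
      refine ⟨hw, ?_⟩
      intro j hj
      by_contra hlt
      have : V.contains x = true := (g3 x).2 ⟨j, by omega, hj⟩
      rw [this] at h2; cases h2
    · intro hx
      obtain ⟨u, adj, hu, hd, hxa⟩ := lvl_pred hx
      have hVx : V.contains x = false := by
        cases hc : V.contains x with
        | false => rfl
        | true =>
          exfalso
          obtain ⟨j, hj, hw⟩ := (g3 x).1 hc
          have := hx.2 j hw
          omega
      apply collect_complete _ V x _ hVx
      exact (mem_flatB tree F x).2 ⟨u, (g2 u).2 hu, adj, hd, hxa⟩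
  · intro x
    rw [collect_set_mem]
    constructor
    · rintro (h | h)
      · obtain ⟨j, hj, hw⟩ := (g3 x).1 h
        exact ⟨j, by omega, hw⟩
      · obtain ⟨u, hu, adj, hd, hxa⟩ := (mem_flatB tree F x).1 h
        exact ⟨k + 1, le_refl _, Walk.step ((g2 u).1 hu).1 hd hxa⟩
    · rintro ⟨j, hj, hw⟩
      rcases Nat.lt_or_ge j (k + 1) with hlt | hge
      · exact Or.inl ((g3 x).2 ⟨j, by omega, hw⟩)
      · have hj1 : j = k + 1 := by omega
        subst hj1
        cases hw with
        | step hwu hd hm =>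
          rename_i u adj
          obtain ⟨j0, hj0, hlvl⟩ := walk_to_lvl _ hwu
          rcases Nat.lt_or_ge j0 k with hlt0 | hge0
          · exact Or.inl ((g3 x).2 ⟨j0 + 1, by omega, Walk.step hlvl.1 hd hm⟩)
          · have : j0 = k := by omega
            subst this
            exact Or.inr ((mem_flatB tree F x).2 ⟨u, (g2 u).2 hlvl, adj, hd, hm⟩)

-- ---------- counting the dict entries by value ----------
def cntE (D : PySem.Dict Int Int) (k : Nat) : Nat :=
  D.values.countP (fun dv => decide ((k : Int) ≤ dv) && (PySem.Int.mod dv 2 == 0))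

def cntO (D : PySem.Dict Int Int) (k : Nat) : Nat :=
  D.values.countP (fun dv => decide ((k : Int) ≤ dv) && !(PySem.Int.mod dv 2 == 0))

def cntV (D : PySem.Dict Int Int) (k : Nat) : Nat :=
  D.values.countP (fun dv => dv == (k : Int))

theorem countP_split (l : List Int) (p q r : Int → Bool)
    (h : ∀ x ∈ l, (p x = true ↔ (q x = true ∨ r x = true)) ∧ ¬(q x = true ∧ r x = true)) :
    l.countP p = l.countP q + l.countP r := by
  induction l with
  | nil => simp
  | cons x t ih =>
    have iht := ih (fun y hy => h y (List.mem_cons_of_mem _ hy))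
    obtain ⟨h1, h2⟩ := h x List.mem_cons_self
    rw [List.countP_cons, List.countP_cons, List.countP_cons, iht]
    cases hq : q x <;> cases hr : r x <;> cases hp : p x <;> simp_all <;> omega

theorem countP_congr' (l : List Int) (p q : Int → Bool)
    (h : ∀ x ∈ l, p x = q x) : l.countP p = l.countP q := by
  induction l with
  | nil => rfl
  | cons x t ih =>
    rw [List.countP_cons, List.countP_cons, h x List.mem_cons_self,
        ih (fun y hy => h y (List.mem_cons_of_mem _ hy))]

theorem pv_mod_two_cast (j : Nat) : PySem.Int.mod ((j : Nat) : Int) 2 = (((j % 2 : Nat)) : Int) :=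
  PySem.Int.mod_natCast j 2

theorem cnt_split_even (D : PySem.Dict Int Int) (k : Nat)
    (hvals : ∀ dv ∈ D.values, ∃ j : Nat, dv = (j : Int)) (hk : k % 2 = 0) :
    cntE D k = cntV D k + cntE D (k + 1) ∧ cntO D k = cntO D (k + 1) := by
  constructor
  · apply countP_split
    intro x hx
    obtain ⟨j, rfl⟩ := hvals x hx
    rw [pv_mod_two_cast]
    constructor
    · simp only [Bool.and_eq_true, decide_eq_true_eq, beq_iff_eq]
      constructor
      · rintro ⟨hle, hmod⟩
        have hj : j % 2 = 0 := by exact_mod_cast hmod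
        have hkj : k ≤ j := by exact_mod_cast hle
        by_cases hje : j = k
        · exact Or.inl (by exact_mod_cast congrArg (fun n : Nat => (n : Int)) hje)
        · exact Or.inr ⟨by push_cast; omega, hmod⟩
      · rintro (h | ⟨hle, hmod⟩)
        · have hje : j = k := by exact_mod_cast h
          subst hje
          exact ⟨le_refl _, by exact_mod_cast congrArg (fun n : Nat => (n : Int)) hk⟩
        · exact ⟨by push_cast at hle ⊢; omega, hmod⟩
    · simp only [Bool.and_eq_true, decide_eq_true_eq, beq_iff_eq]
      rintro ⟨h1, h2, _⟩
      have hje : j = k := by exact_mod_cast h1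
      subst hje
      push_cast at h2
      omega
  · apply countP_congr'
    intro x hx
    obtain ⟨j, rfl⟩ := hvals x hx
    rw [pv_mod_two_cast]
    by_cases hjk : j = k
    · subst hjk
      have : (j % 2 : Nat) = 0 := hk
      simp [this] <;> omega
    · by_cases hge : k ≤ j
      · have h1 : ((k : Int) ≤ (j : Int)) := by exact_mod_cast hge
        have h2 : (((k + 1 : Nat) : Int) ≤ (j : Int)) := by push_cast; omega
        simp [h1, h2] <;> omega
      · have h1 : ¬ ((k : Int) ≤ (j : Int)) := by exact_mod_cast hge
        have h2 : ¬ (((k + 1 : Nat) : Int) ≤ (j : Int)) := by push_cast at h1 ⊢; omega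
        simp [h1, h2] <;> omega

theorem cnt_split_odd (D : PySem.Dict Int Int) (k : Nat)
    (hvals : ∀ dv ∈ D.values, ∃ j : Nat, dv = (j : Int)) (hk : k % 2 = 1) :
    cntO D k = cntV D k + cntO D (k + 1) ∧ cntE D k = cntE D (k + 1) := by
  constructor
  · apply countP_split
    intro x hx
    obtain ⟨j, rfl⟩ := hvals x hx
    rw [pv_mod_two_cast]
    constructor
    · simp only [Bool.and_eq_true, Bool.not_eq_true', decide_eq_true_eq, beq_iff_eq, beq_eq_false_iff_ne, ne_eq]
      constructor
      · rintro ⟨hle, hmod⟩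
        have hkj : k ≤ j := by exact_mod_cast hle
        by_cases hje : j = k
        · exact Or.inl (by exact_mod_cast congrArg (fun n : Nat => (n : Int)) hje)
        · exact Or.inr ⟨by push_cast; omega, hmod⟩
      · rintro (h | ⟨hle, hmod⟩)
        · have hje : j = k := by exact_mod_cast h
          subst hje
          refine ⟨le_refl _, ?_⟩
          intro hc
          have : (j % 2 : Nat) = 0 := by exact_mod_cast hc
          omega
        · exact ⟨by push_cast at hle ⊢; omega, hmod⟩
    · simp only [Bool.and_eq_true, Bool.not_eq_true', decide_eq_true_eq, beq_iff_eq]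
      rintro ⟨h1, h2, _⟩
      have hje : j = k := by exact_mod_cast h1
      subst hje
      push_cast at h2
      omega
  · apply countP_congr'
    intro x hx
    obtain ⟨j, rfl⟩ := hvals x hx
    rw [pv_mod_two_cast]
    by_cases hjk : j = k
    · subst hjk
      have h2 : ¬ (((j % 2 : Nat) : Int) = 0) := by
        intro hc
        have : (j % 2 : Nat) = 0 := by exact_mod_cast hc
        omega
      simp [h2] <;> omega
    · by_cases hge : k ≤ j
      · have h1 : ((k : Int) ≤ (j : Int)) := by exact_mod_cast hge
        have h2 : (((k + 1 : Nat) : Int) ≤ (j : Int)) := by push_cast; omega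
        simp [h1, h2] <;> omega
      · have h1 : ¬ ((k : Int) ≤ (j : Int)) := by exact_mod_cast hge
        have h2 : ¬ (((k + 1 : Nat) : Int) ≤ (j : Int)) := by push_cast at h1 ⊢; omega
        simp [h1, h2] <;> omega

theorem frontier_card (D : PySem.Dict Int Int) (hnd : D.keys.Nodup) (F : List Int) (k : Nat)
    (hF : F.Nodup) (hmem : ∀ x, x ∈ F ↔ D.get? x = some ((k : Nat) : Int)) :
    F.length = cntV D k := by
  have hval : cntV D k = (D.items.filter (fun kv => kv.2 == ((k : Nat) : Int))).length := by
    unfold cntV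
    rw [show D.values = D.items.map (fun kv => kv.2) from rfl, List.countP_map,
        List.countP_eq_length_filter]
    rfl
  set L := D.items.filter (fun kv => kv.2 == ((k : Nat) : Int)) with hL
  set K := L.map (fun kv => kv.1) with hK
  have hKnd : K.Nodup := by
    have hsub : List.Sublist L D.items := List.filter_sublist
    have : List.Sublist K (D.items.map (fun kv => kv.1)) := hsub.map _
    exact List.Nodup.sublist this hnd
  have hKF : ∀ x, x ∈ K ↔ x ∈ F := by
    intro x
    constructor
    · intro hx
      obtain ⟨kv, hkv, hfst⟩ := List.mem_map.1 hx
      have h1 := List.mem_filter.1 hkv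
      have h2 : kv.2 = ((k : Nat) : Int) := by simpa using h1.2
      have : D.get? x = some ((k : Nat) : Int) := by
        rw [(PySem.Dict.get?_eq_some_iff_mem_items D x _ hnd)]
        rw [← hfst, ← h2]
        exact h1.1
      exact (hmem x).2 this
    · intro hx
      have h1 := (hmem x).1 hx
      have h2 : (x, ((k : Nat) : Int)) ∈ L := by
        apply List.mem_filter.2
        exact ⟨PySem.Dict.mem_items_of_get?_eq_some D h1, by simp⟩
      exact List.mem_map.2 ⟨(x, ((k : Nat) : Int)), h2, rfl⟩
  have h1 : F.length ≤ K.length := by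
    have := pv_nodup_length_le hF (fun z hz => (hKF z).2 hz)
    rwa [List.Nodup.dedup hKnd] at this
  have h2 : K.length ≤ F.length := by
    have := pv_nodup_length_le hKnd (fun z hz => (hKF z).1 hz)
    rwa [List.Nodup.dedup hF] at this
  have h3 : K.length = L.length := by rw [hK]; exact List.length_map _
  rw [hval]
  omega

-- every value of the characterised dict is a Nat cast
theorem vals_nat (tree : List (Int × List Int)) (D : PySem.Dict Int Int)
    (hnd : D.keys.Nodup)
    (hchar : ∀ x dv, D.get? x = some dv ↔ ∃ k : Nat, dv = (k : Int) ∧ Lvl tree x k) :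
    ∀ dv ∈ D.values, ∃ j : Nat, dv = (j : Int) := by
  intro dv hdv
  obtain ⟨⟨kx, kv2⟩, hkv, hsnd⟩ := List.mem_map.1 hdv
  have hget : D.get? kx = some kv2 := PySem.Dict.get?_of_mem_items D hkv hnd
  obtain ⟨j, hj, _⟩ := (hchar kx kv2).1 hget
  exact ⟨j, by rw [← hsnd, hj]⟩

-- the main ghost lemma: from a level-k state, the ghost adds exactly the number of
-- dict entries of each parity at levels ≥ k
theorem ghost_counts (tree : List (Int × List Int)) (D : PySem.Dict Int Int)
    (hnd : D.keys.Nodup)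
    (hchar : ∀ x dv, D.get? x = some dv ↔ ∃ k : Nat, dv = (k : Int) ∧ Lvl tree x k) :
    ∀ (n k : Nat) (F : List Int) (V : PySem.Set Int) (e o : Int),
    n = cntE D k + cntO D k →
    GInv tree k F V →
    loopB tree F V (PySem.Int.mod ((k : Nat) : Int) 2) (e, o)
      = (e + (cntE D k : Int), o + (cntO D k : Int)) := by
  have hvals : ∀ dv ∈ D.values, ∃ j : Nat, dv = (j : Int) := vals_nat tree D hnd hchar
  intro n
  induction n using Nat.strong_induction_on with
  | _ n IH =>
  intro k F V e o hn hinv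
  obtain ⟨g1, g2, g3⟩ := hinv
  cases hF : F with
  | nil =>
    rw [loopB_nil]
    have hnolvl : ∀ y, ¬ Lvl tree y k := by
      intro y hy
      have := (g2 y).2 hy
      rw [hF] at this
      cases this
    have hsmall : ∀ dv ∈ D.values, ¬ ((k : Int) ≤ dv) := by
      intro dv hdv hge
      obtain ⟨⟨kx, kv2⟩, hkv, hsnd⟩ := List.mem_map.1 hdv
      have hget : D.get? kx = some kv2 := PySem.Dict.get?_of_mem_items D hkv hnd
      obtain ⟨j, hj, hlvl⟩ := (hchar kx kv2).1 hget
      have hjk : k ≤ j := by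
        have hdvj : dv = (j : Int) := by rw [← hsnd, hj]
        rw [hdvj] at hge
        exact_mod_cast hge
      exact no_lvl_ge hnolvl j hjk kx hlvl
    have hE : cntE D k = 0 := by
      rw [cntE, List.countP_eq_zero]
      intro dv hdv
      simp only [Bool.and_eq_true, decide_eq_true_eq, not_and]
      intro hge
      exact absurd hge (hsmall dv hdv)
    have hO : cntO D k = 0 := by
      rw [cntO, List.countP_eq_zero]
      intro dv hdv
      simp only [Bool.and_eq_true, decide_eq_true_eq, not_and]
      intro hge
      exact absurd hge (hsmall dv hdv)
    rw [hE, hO]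
    simp
  | cons x rest =>
    subst hF
    -- frontier membership in terms of the dict
    have hmemD : ∀ y, y ∈ (x :: rest) ↔ D.get? y = some ((k : Nat) : Int) := by
      intro y
      rw [g2 y, hchar y]
      constructor
      · intro h; exact ⟨k, rfl, h⟩
      · rintro ⟨k', hk', hlvl⟩
        have : k' = k := by exact_mod_cast hk'.symm
        exact this ▸ hlvl
    have hlenF : (x :: rest).length = cntV D k := frontier_card D hnd _ k g1 hmemD
    have hV1 : cntV D k ≥ 1 := by
      rw [← hlenF]; simp
    -- one ghost round
    rw [loopB_cons, innerB_eq, List.nil_append]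
    have hinv' : GInv tree (k + 1) (collect V (flatB tree (x :: rest))).2
        (collect V (flatB tree (x :: rest))).1 :=
      GInv_step tree k (x :: rest) V ⟨g1, g2, g3⟩
    have hflip : 1 - PySem.Int.mod ((k : Nat) : Int) 2 = PySem.Int.mod (((k + 1 : Nat)) : Int) 2 := by
      rw [pv_mod_flip]
      push_cast
      ring_nf
    rcases Nat.mod_two_eq_zero_or_one k with hk | hk
    · -- even level: the frontier is counted into e
      have hsplit := cnt_split_even D k hvals hk
      have hmod0 : PySem.Int.mod ((k : Nat) : Int) 2 = 0 := by
        rw [pv_mod_two_cast, hk]; rfl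
      have hlt : cntE D (k + 1) + cntO D (k + 1) < n := by omega
      have hIH := IH _ hlt (k + 1) _ _ (e + ((x :: rest).length : Int)) o rfl hinv'
      rw [hmod0] at hflip ⊢
      simp only [beq_self_eq_true, if_true]
      rw [hflip, hIH]
      have h1 := hsplit.1
      have h2 := hsplit.2
      rw [Prod.mk.injEq]
      constructor <;> omega
    · -- odd level: the frontier is counted into o
      have hsplit := cnt_split_odd D k hvals hk
      have hmod1 : PySem.Int.mod ((k : Nat) : Int) 2 = 1 := by
        rw [pv_mod_two_cast, hk]; rfl
      have hlt : cntE D (k + 1) + cntO D (k + 1) < n := by omega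
      have hIH := IH _ hlt (k + 1) _ _ e (o + ((x :: rest).length : Int)) rfl hinv'
      rw [hmod1] at hflip ⊢
      simp only [show ((1 : Int) == 0) = false from rfl, Bool.false_eq_true, if_false]
      rw [hflip, hIH]
      have h1 := hsplit.1
      have h2 := hsplit.2
      rw [Prod.mk.injEq]
      constructor <;> omega

-- ---------- assembling both programs\' results ----------
theorem count_fold (l : List Int) : ∀ (e o : Int),
    l.foldl (fun p dv => if PySem.Int.mod dv 2 == 0 then (p.1 + 1, p.2) else (p.1, p.2 + 1)) (e, o)
      = (e + (l.countP (fun dv => PySem.Int.mod dv 2 == 0) : Int),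
         o + (l.countP (fun dv => !(PySem.Int.mod dv 2 == 0)) : Int)) := by
  induction l with
  | nil => intro e o; simp
  | cons x t ih =>
    intro e o
    rw [List.foldl_cons, List.countP_cons, List.countP_cons]
    cases hx : (PySem.Int.mod x 2 == 0) with
    | true =>
      simp only [hx, if_true, Bool.not_true]
      rw [ih]
      rw [Prod.mk.injEq]
      constructor <;> push_cast <;> ring
    | false =>
      simp only [hx, if_false, Bool.not_false]
      rw [ih]
      rw [Prod.mk.injEq]
      constructor <;> push_cast <;> ring

theorem alt_counts (tree : List (Int × List Int)) :
    count_vertices_by_level_alt tree =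
      ((cntE (bfLoop tree ((PySem.Dict.empty : PySem.Dict Int Int).insert 0 0) (by decide)) 0 : Int),
       (cntO (bfLoop tree ((PySem.Dict.empty : PySem.Dict Int Int).insert 0 0) (by decide)) 0 : Int)) := by
  have hnd := bfLoop_nodup tree ((PySem.Dict.empty : PySem.Dict Int Int).insert 0 0) (by decide)
  have hchar := bf_char tree
  have hvals := vals_nat tree _ hnd hchar
  show (bfLoop tree ((PySem.Dict.empty : PySem.Dict Int Int).insert 0 0) (by decide)).values.foldl
      (fun p dv => if PySem.Int.mod dv 2 == 0 then (p.1 + 1, p.2) else (p.1, p.2 + 1)) (0, 0) = _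
  rw [count_fold]
  have hE : (bfLoop tree ((PySem.Dict.empty : PySem.Dict Int Int).insert 0 0) (by decide)).values.countP
      (fun dv => PySem.Int.mod dv 2 == 0)
      = cntE (bfLoop tree ((PySem.Dict.empty : PySem.Dict Int Int).insert 0 0) (by decide)) 0 := by
    unfold cntE
    apply countP_congr'
    intro dv hdv
    obtain ⟨j, rfl⟩ := hvals dv hdv
    have h0 : (((0 : Nat) : Int) ≤ (j : Int)) := by push_cast; omega
    simp [h0]
  have hO : (bfLoop tree ((PySem.Dict.empty : PySem.Dict Int Int).insert 0 0) (by decide)).values.countP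
      (fun dv => !(PySem.Int.mod dv 2 == 0))
      = cntO (bfLoop tree ((PySem.Dict.empty : PySem.Dict Int Int).insert 0 0) (by decide)) 0 := by
    unfold cntO
    apply countP_congr'
    intro dv hdv
    obtain ⟨j, rfl⟩ := hvals dv hdv
    have h0 : (((0 : Nat) : Int) ≤ (j : Int)) := by push_cast; omega
    simp [h0]
  rw [hE, hO, Prod.mk.injEq]
  constructor <;> omega

-- ===== VERDICT (by name: the statements are the Claim_ definitions above) =====
theorem count_vertices_by_level_spec : Claim_equal_count_vertices_by_level := by
  intro tree _ hpre
  unfold Spec_count_vertices_by_level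
  have hnd := bfLoop_nodup tree ((PySem.Dict.empty : PySem.Dict Int Int).insert 0 0) (by decide)
  have hchar := bf_char tree
  -- A's BFS equals the ghost level-synchronous loop (under Pre_: all reachable vertices are keys)
  have hRk : ∀ x, Reach tree x → (dget tree x).isSome = true := by
    intro x hx
    exact pv_mem_keys_isSome (hpre x (pv_cmem (reach_in_reachSet tree x hx)))
  have hcur : ∀ x ∈ [(0 : Int)], Reach tree x := by
    intro x hx
    rcases List.mem_singleton.1 hx with rfl
    exact Reach.zero
  have h := rounds tree _ [(0 : Int)] PySem.Set.empty 0 0 0 hRk hcur rfl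
  have hcoll : collect PySem.Set.empty [(0 : Int)] = (PySem.Set.empty.add 0, [(0 : Int)]) := by decide
  -- the ghost starts in a valid level-0 state
  have hinv0 : GInv tree 0 [(0 : Int)] (PySem.Set.empty.add 0) := by
    refine ⟨List.nodup_singleton _, ?_, ?_⟩
    · intro x
      constructor
      · intro hx
        rcases List.mem_singleton.1 hx with rfl
        exact ⟨Walk.zero, fun j _ => Nat.zero_le j⟩
      · intro hx
        have h0 := walk_zero_eq hx.1
        subst h0
        exact List.mem_singleton.2 rfl
    · intro x
      constructor
      · intro hx
        rcases (PySem.Set.mem_add PySem.Set.empty 0 x).1 (pv_cmem hx) with h2 | h2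
        · cases h2
        · exact ⟨0, le_refl 0, h2 ▸ Walk.zero⟩
      · rintro ⟨j, hj, hw⟩
        have hj0 : j = 0 := Nat.le_zero.1 hj
        subst hj0
        have h0 := walk_zero_eq hw
        subst h0
        exact pv_contains_add_self PySem.Set.empty 0
  have hG := ghost_counts tree _ hnd hchar
    (cntE (bfLoop tree ((PySem.Dict.empty : PySem.Dict Int Int).insert 0 0) (by decide)) 0
      + cntO (bfLoop tree ((PySem.Dict.empty : PySem.Dict Int Int).insert 0 0) (by decide)) 0)
    0 [(0 : Int)] (PySem.Set.empty.add 0) 0 0 rfl hinv0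
  simp only [Nat.cast_zero] at hG
  unfold count_vertices_by_level
  have hmap : ([(0 : Int)].map (fun m => (m, (0 : Int)))) = [((0 : Int), (0 : Int))] := rfl
  rw [← hmap, h]
  rw [hcoll]
  rw [hG, alt_counts tree, Prod.mk.injEq]
  constructor <;> omega
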